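-- pv_equiv track=rewrite | github.com/mingxoxo/Algorithm | baekjoon/16948.py | BFS
-- ===== SOURCE A (Python) =====
-- from collections import deque
--
-- def BFS(N, r1, c1, r2, c2):
--     dr = [-2, -2, 0, 0, 2, 2]
--     dc = [-1, 1, -2, 2, -1, 1]
--     board = [[0] * N for _ in range(N)]
--     queue = deque([(r1, c1)])
--     while queue:
--         node = queue.popleft()
--         r, c = node[0], node[1]
--         if (r, c) == (r2, c2):
--             return board[r][c]
--         for i in range(6):
--             nr, nc = r + dr[i], c + dc[i]
--             if 0 <= nr < N and 0 <= nc < N and board[nr][nc] == 0: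
--                 board[nr][nc] = board[r][c] + 1
--                 queue.append((nr, nc))
--     return -1
-- ===== SOURCE B (Python) =====
-- def BFS(N, r1, c1, r2, c2):
--     # Bellman-Ford-style value iteration instead of BFS: no queue/frontier at
--     # all; repeatedly sweep the whole grid, labelling each unlabelled cell one
--     # of whose predecessors was labelled in the previous round, until the
--     # target is labelled or a sweep changes nothing.
--     preds = [(2, 1), (2, -1), (0, 2), (0, -2), (-2, 1), (-2, -1)]
--     dist = [[-1] * N for _ in range(N)]
--     if 0 <= r1 < N and 0 <= c1 < N:
--         dist[r1][c1] = 0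
--     d = 0
--     changed = True
--     while changed:
--         if 0 <= r2 < N and 0 <= c2 < N and dist[r2][c2] != -1:
--             return dist[r2][c2]
--         changed = False
--         d += 1
--         for r in range(N):
--             for c in range(N):
--                 if dist[r][c] == -1:
--                     for (pr, pc) in preds:
--                         qr, qc = r + pr, c + pc
--                         if 0 <= qr < N and 0 <= qc < N and dist[qr][qc] == d - 1:
--                             dist[r][c] = d
--                             changed = True
--                             break
--     return -1
-- ===== Notes on version B (the rewrite author's own statement) =====
-- stated objective: alternative
-- what changed: Replaces BFS entirely by Bellman-Ford-style value iteration: no queue, frontier or visited set; a distance grid is repeatedly swept in row-major order, labelling each unlabelled cell that has a predecessor labelled in the previous round, until the target is labelled or a sweep changes nothing.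
-- outside the precondition, e.g. on BFS(3, -1, 0, 1, 1): A returns 1, B returns -1; on BFS(3, -1, 0, -1, 0): A returns 0, B returns -1
import Mathlib
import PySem

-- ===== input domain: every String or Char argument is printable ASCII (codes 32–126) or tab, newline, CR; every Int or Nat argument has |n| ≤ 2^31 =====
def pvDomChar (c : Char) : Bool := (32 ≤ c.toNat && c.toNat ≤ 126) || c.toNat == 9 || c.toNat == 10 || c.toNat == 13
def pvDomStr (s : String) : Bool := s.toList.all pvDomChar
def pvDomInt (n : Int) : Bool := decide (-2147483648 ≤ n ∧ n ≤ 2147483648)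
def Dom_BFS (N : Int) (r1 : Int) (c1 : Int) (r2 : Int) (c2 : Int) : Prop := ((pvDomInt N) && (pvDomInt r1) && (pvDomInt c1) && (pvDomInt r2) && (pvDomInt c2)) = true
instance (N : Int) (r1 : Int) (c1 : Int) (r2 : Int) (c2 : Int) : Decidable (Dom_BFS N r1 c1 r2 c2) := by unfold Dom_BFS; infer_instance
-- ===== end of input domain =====

-- B replaces A's BFS (FIFO queue over a distance board) by Bellman-Ford-style value iteration:
-- repeated whole-grid sweeps labelling cells from already-labelled predecessors; objective:
-- alternative (not faster).

-- ===== PORT A =====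
def pvDr : List Int := [-2, -2, 0, 0, 2, 2]
def pvDc : List Int := [-1, 1, -2, 2, -1, 1]

-- board[r][c] as the Pythons read it; within Pre_ every read performed is in range, so the
-- `.getD 0` default (Python would raise IndexError there) is never hit on admitted runs.
def pvBget (b : List (List Int)) (r c : Int) : Int :=
  ((PySem.List.pyGet? b r).bind (fun row => PySem.List.pyGet? row c)).getD 0

-- board[r][c] = v; both Pythons only assign under a guard 0 <= r < N and 0 <= c < N,
-- where `.toNat` is exact.
def pvBset (b : List (List Int)) (r c : Int) (v : Int) : List (List Int) :=
  match b[r.toNat]? with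
  | some row => b.set r.toNat (row.set c.toNat v)
  | none => b

-- the body of A's `for i in range(6)` loop (state: the board and the cells appended to the queue)
def pvAexpand (N r c : Int) (st : List (List Int) × List (Int × Int)) (i : Nat) :
    List (List Int) × List (Int × Int) :=
  let nr := r + pvDr.getD i 0
  let nc := c + pvDc.getD i 0
  if 0 ≤ nr ∧ nr < N ∧ 0 ≤ nc ∧ nc < N ∧ pvBget st.1 nr nc = 0 then
    (pvBset st.1 nr nc (pvBget st.1 r c + 1), st.2 ++ [(nr, nc)])
  else st

-- A's `while queue:` loop; the Nat argument is a pure fuel guard making the recursion total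
-- (proved never to run out on inputs satisfying Pre_; it changes no computed value there).
def pvAloop (N r2 c2 : Int) : Nat → List (List Int) → List (Int × Int) → Int
  | 0, _, _ => -1
  | _ + 1, _, [] => -1
  | fuel + 1, board, (r, c) :: rest =>
    if r = r2 ∧ c = c2 then pvBget board r c
    else
      let s := (List.range 6).foldl (pvAexpand N r c) (board, [])
      pvAloop N r2 c2 fuel s.1 (rest ++ s.2)

def BFS (N : Int) (r1 : Int) (c1 : Int) (r2 : Int) (c2 : Int) : Int :=
  pvAloop N r2 c2 (2 * (N.toNat * N.toNat) + 2)
    (List.replicate N.toNat (List.replicate N.toNat 0)) [(r1, c1)]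

-- ===== PORT B =====
def pvPreds : List (Int × Int) := [(2, 1), (2, -1), (0, 2), (0, -2), (-2, 1), (-2, -1)]

-- the cells (r, c) of B's nested `for r in range(N): for c in range(N):`, in row-major order
def pvGrid (N : Int) : List (Int × Int) :=
  ((List.range N.toNat) ×ˢ (List.range N.toNat)).map (fun q => ((q.1 : Int), (q.2 : Int)))

-- one cell of B's sweep; B's inner `for ... break` loop performs a single assignment at the
-- first matching predecessor, which is exactly `List.any` followed by one assignment.
def pvCell (N d : Int) (st : List (List Int) × Bool) (p : Int × Int) :
    List (List Int) × Bool :=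
  if pvBget st.1 p.1 p.2 = -1 ∧
      pvPreds.any (fun m =>
        decide (0 ≤ p.1 + m.1 ∧ p.1 + m.1 < N ∧ 0 ≤ p.2 + m.2 ∧ p.2 + m.2 < N ∧
          pvBget st.1 (p.1 + m.1) (p.2 + m.2) = d - 1)) = true
  then (pvBset st.1 p.1 p.2 d, true) else st

-- one whole round of B: `changed = False` then the nested for-loops
def pvSweep (N d : Int) (g : List (List Int)) : List (List Int) × Bool :=
  (pvGrid N).foldl (pvCell N d) (g, false)

-- B's `while changed:` loop; the Nat argument is a pure fuel guard (never exhausted under Pre_).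
def pvVIloop (N r2 c2 : Int) : Nat → List (List Int) → Int → Int
  | 0, _, _ => -1
  | fuel + 1, g, d =>
    if 0 ≤ r2 ∧ r2 < N ∧ 0 ≤ c2 ∧ c2 < N ∧ pvBget g r2 c2 ≠ -1 then pvBget g r2 c2
    else
      let s := pvSweep N (d + 1) g
      if s.2 then pvVIloop N r2 c2 fuel s.1 (d + 1) else -1

def BFS_alt (N : Int) (r1 : Int) (c1 : Int) (r2 : Int) (c2 : Int) : Int :=
  let g0 := List.replicate N.toNat (List.replicate N.toNat (-1 : Int))
  let g1 := if 0 ≤ r1 ∧ r1 < N ∧ 0 ≤ c1 ∧ c1 < N then pvBset g0 r1 c1 0 else g0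
  pvVIloop N r2 c2 (N.toNat * N.toNat + 2) g1 0

-- ===== PRECONDITION & SPEC =====
-- Pre_ admits the problem's natural domain (both cells on the N×N board, as the Baekjoon statement
-- guarantees) and additionally every input whose start square has no on-board death-knight
-- neighbour and differs from the target (there A returns -1 without ever indexing the board);
-- it excludes only inputs that A can answer solely through Python's negative-index wraparound
-- (an artefact of list indexing) or on which A raises IndexError.
def Pre_BFS (N : Int) (r1 : Int) (c1 : Int) (r2 : Int) (c2 : Int) : Prop :=
  (0 ≤ r1 ∧ r1 < N ∧ 0 ≤ c1 ∧ c1 < N ∧ 0 ≤ r2 ∧ r2 < N ∧ 0 ≤ c2 ∧ c2 < N) ∨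
  (¬(r1 = r2 ∧ c1 = c2) ∧
   ¬(0 ≤ r1 - 2 ∧ r1 - 2 < N ∧ 0 ≤ c1 - 1 ∧ c1 - 1 < N) ∧
   ¬(0 ≤ r1 - 2 ∧ r1 - 2 < N ∧ 0 ≤ c1 + 1 ∧ c1 + 1 < N) ∧
   ¬(0 ≤ r1 ∧ r1 < N ∧ 0 ≤ c1 - 2 ∧ c1 - 2 < N) ∧
   ¬(0 ≤ r1 ∧ r1 < N ∧ 0 ≤ c1 + 2 ∧ c1 + 2 < N) ∧
   ¬(0 ≤ r1 + 2 ∧ r1 + 2 < N ∧ 0 ≤ c1 - 1 ∧ c1 - 1 < N) ∧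
   ¬(0 ≤ r1 + 2 ∧ r1 + 2 < N ∧ 0 ≤ c1 + 1 ∧ c1 + 1 < N))
instance (N : Int) (r1 : Int) (c1 : Int) (r2 : Int) (c2 : Int) : Decidable (Pre_BFS N r1 c1 r2 c2) := by
  unfold Pre_BFS; infer_instance
def pvWitness_BFS : Int × Int × Int × Int × Int := (5, 0, 0, 4, 4)

def Spec_BFS (N : Int) (r1 : Int) (c1 : Int) (r2 : Int) (c2 : Int) (out : Int) : Prop := out = BFS_alt N r1 c1 r2 c2
instance (N : Int) (r1 : Int) (c1 : Int) (r2 : Int) (c2 : Int) (out : Int) : Decidable (Spec_BFS N r1 c1 r2 c2 out) := by unfold Spec_BFS; infer_instance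

-- ===== CLAIM (what is proved, stated in full; the proofs are below) =====
def Claim_equal_BFS : Prop := ∀ (N : Int) (r1 : Int) (c1 : Int) (r2 : Int) (c2 : Int), Dom_BFS N r1 c1 r2 c2 → Pre_BFS N r1 c1 r2 c2 → Spec_BFS N r1 c1 r2 c2 (BFS N r1 c1 r2 c2)

-- ===== LEMMAS AND PROOFS =====

-- proof-side reference implementation: level-synchronous BFS (visited set + frontier per wave).
-- The proof goes A = pvLevelBFS (queue/wave simulation) and pvLevelBFS = B (wave/sweep simulation).
def pvMoves : List (Int × Int) := [(-2, -1), (-2, 1), (0, -2), (0, 2), (2, -1), (2, 1)]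

def pvBinner (N r2 c2 r c : Int)
    (acc : Sum Unit (PySem.Set (Int × Int) × List (Int × Int))) (m : Int × Int) :
    Sum Unit (PySem.Set (Int × Int) × List (Int × Int)) :=
  match acc with
  | Sum.inl u => Sum.inl u
  | Sum.inr (vis, nxt) =>
    let p : Int × Int := (r + m.1, c + m.2)
    if 0 ≤ p.1 ∧ p.1 < N ∧ 0 ≤ p.2 ∧ p.2 < N ∧ p ∉ vis then
      if p = (r2, c2) then Sum.inl ()
      else Sum.inr (PySem.Set.add vis p, nxt ++ [p])
    else Sum.inr (vis, nxt)

def pvBstep (N r2 c2 : Int) (vis : PySem.Set (Int × Int)) (frontier : List (Int × Int)) :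
    Sum Unit (PySem.Set (Int × Int) × List (Int × Int)) :=
  frontier.foldl (fun acc rc => pvMoves.foldl (pvBinner N r2 c2 rc.1 rc.2) acc) (Sum.inr (vis, []))

def pvBloop (N r2 c2 : Int) : Nat → PySem.Set (Int × Int) → List (Int × Int) → Int → Int
  | 0, _, _, _ => -1
  | fuel + 1, vis, frontier, dist =>
    match frontier with
    | [] => -1
    | _ :: _ =>
      match pvBstep N r2 c2 vis frontier with
      | Sum.inl _ => dist + 1
      | Sum.inr (vis', nxt) => pvBloop N r2 c2 fuel vis' nxt (dist + 1)

def pvLevelBFS (N : Int) (r1 : Int) (c1 : Int) (r2 : Int) (c2 : Int) : Int :=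
  if r1 = r2 ∧ c1 = c2 then 0
  else pvBloop N r2 c2 (N.toNat * N.toNat + 2) (PySem.Set.ofList [(r1, c1)]) [(r1, c1)] 0

-- proof-side notions
def pvInb (N : Int) (p : Int × Int) : Prop := 0 ≤ p.1 ∧ p.1 < N ∧ 0 ≤ p.2 ∧ p.2 < N

def pvU (N : Int) (b : List (List Int)) : Nat :=
  (pvGrid N).countP (fun p => pvBget b p.1 p.2 == 0)

def pvIdim (N : Int) (b : List (List Int)) : Prop :=
  b.length = N.toNat ∧ ∀ row ∈ b, row.length = N.toNat

def pvNonneg (b : List (List Int)) : Prop := ∀ row ∈ b, ∀ x ∈ row, 0 ≤ x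

def pvMonoEq (b b' : List (List Int)) : Prop :=
  ∀ r c : Int, pvBget b r c ≠ 0 → pvBget b' r c = pvBget b r c

def pvInert (N : Int) (t : Int × Int) (b : List (List Int)) (e : Int × Int) : Prop :=
  e ≠ t ∧ ∀ m ∈ pvMoves, pvInb N (e.1 + m.1, e.2 + m.2) → pvBget b (e.1 + m.1) (e.2 + m.2) ≠ 0

def pvSInv (N : Int) (s t : Int × Int) (b : List (List Int)) (vis : List (Int × Int)) : Prop :=
  pvIdim N b ∧ pvNonneg b ∧
  (∀ p : Int × Int, pvInb N p → (p ∈ vis ↔ (pvBget b p.1 p.2 ≠ 0 ∨ p = s))) ∧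
  s ∈ vis ∧ t ∉ vis

-- A's queue = the wave frontier plus interleaved "inert" extras (only the re-enqueued start in fact)
inductive pvAug (P : Int × Int → Prop) : List (Int × Int) → List (Int × Int) → Prop
  | nil : pvAug P [] []
  | cons (x : Int × Int) {F Q : List (Int × Int)} : pvAug P F Q → pvAug P (x :: F) (x :: Q)
  | extra (e : Int × Int) {F Q : List (Int × Int)} : P e → pvAug P F Q → pvAug P F (e :: Q)

-- A's expansion fold re-indexed by the move pairs themselves
def pvAexpandP (N r c : Int) (st : List (List Int) × List (Int × Int)) (m : Int × Int) :
    List (List Int) × List (Int × Int) :=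
  let nr := r + m.1
  let nc := c + m.2
  if 0 ≤ nr ∧ nr < N ∧ 0 ≤ nc ∧ nc < N ∧ pvBget st.1 nr nc = 0 then
    (pvBset st.1 nr nc (pvBget st.1 r c + 1), st.2 ++ [(nr, nc)])
  else st

lemma pvAfold_eq (N r c : Int) (st : List (List Int) × List (Int × Int)) :
    (List.range 6).foldl (pvAexpand N r c) st = pvMoves.foldl (pvAexpandP N r c) st := by
  have hmv : pvMoves = (List.range 6).map (fun i => (pvDr.getD i 0, pvDc.getD i 0)) := by decide
  rw [hmv, List.foldl_map]
  exact (PySem.List.foldl_congr_mem _ _ _ _ (fun st i _ => rfl)).symm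
lemma pyGet?_set_row {b : List (List Int)} {r : Nat} {row : List Int} (hb : b[r]? = some row)
    (rs : List Int) (i : Int) :
    PySem.List.pyGet? (b.set r rs) i = PySem.List.pyGet? b i ∨
    (PySem.List.pyGet? b i = some row ∧ PySem.List.pyGet? (b.set r rs) i = some rs) := by
  have hlt : r < b.length := (List.getElem?_eq_some_iff.mp hb).1
  unfold PySem.List.pyGet?
  rw [List.length_set]
  cases hk : PySem.List.pyIdx? b.length i with
  | none => simp
  | some k =>
    simp only [Option.bind_some]
    by_cases hkr : k = r
    · subst hkr
      exact Or.inr ⟨hb, List.getElem?_set_self hlt⟩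
    · rw [List.getElem?_set_ne (fun h => hkr h.symm)]
      exact Or.inl rfl

lemma pyGet?_set_elem {row : List Int} {c : Nat} (hc : c < row.length) (v : Int) (j : Int) :
    PySem.List.pyGet? (row.set c v) j = PySem.List.pyGet? row j ∨
    (PySem.List.pyGet? row j = row[c]? ∧ PySem.List.pyGet? (row.set c v) j = some v) := by
  unfold PySem.List.pyGet?
  rw [List.length_set]
  cases hk : PySem.List.pyIdx? row.length j with
  | none => simp
  | some k =>
    simp only [Option.bind_some]
    by_cases hkc : k = c
    · subst hkc
      exact Or.inr ⟨rfl, List.getElem?_set_self hc⟩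
    · rw [List.getElem?_set_ne (fun h => hkc h.symm)]
      exact Or.inl rfl

lemma pyGet?_nonneg_lt {α : Type} (l : List α) (i : Int) (h0 : 0 ≤ i) (hl : i.toNat < l.length) :
    PySem.List.pyGet? l i = l[i.toNat]? := by
  unfold PySem.List.pyGet? PySem.List.pyIdx?
  have : i < (l.length : Int) := by omega
  simp [h0, this]

lemma pvBget_bset_master {N : Int} {b : List (List Int)} (hd : pvIdim N b) {r c : Int}
    (h : pvInb N (r, c)) (v : Int) (r' c' : Int) :
    (pvBget (pvBset b r c v) r' c' = pvBget b r' c') ∨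
    (pvBget b r' c' = pvBget b r c ∧ pvBget (pvBset b r c v) r' c' = v) := by
  obtain ⟨h1, h2, h3, h4⟩ := h
  obtain ⟨hlen, hrows⟩ := hd
  have hrlt : r.toNat < b.length := by omega
  cases hb : b[r.toNat]? with
  | none => simp at hb; omega
  | some row =>
    have hrowlen : row.length = N.toNat := hrows row (List.mem_of_getElem? hb)
    have hclt : c.toNat < row.length := by omega
    have hrget : PySem.List.pyGet? b r = some row := by
      rw [pyGet?_nonneg_lt b r h1 hrlt]; exact hb
    have hbset : pvBset b r c v = b.set r.toNat (row.set c.toNat v) := by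
      unfold pvBset; rw [hb]
    have hrowc : PySem.List.pyGet? row c = row[c.toNat]? := pyGet?_nonneg_lt row c h3 hclt
    rw [hbset]
    unfold pvBget
    rcases pyGet?_set_row hb (row.set c.toNat v) r' with hsame | ⟨hold, hnew⟩
    · rw [hsame]
      exact Or.inl rfl
    · rw [hold, hnew]
      simp only [Option.bind_some]
      rcases pyGet?_set_elem hclt v c' with hsame2 | ⟨hold2, hnew2⟩
      · rw [hsame2]; exact Or.inl rfl
      · rw [hold2, hnew2, hrget]
        simp only [Option.bind_some]
        rw [hrowc]
        exact Or.inr ⟨rfl, rfl⟩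

lemma pvBget_nonneg {b : List (List Int)} (h : pvNonneg b) (r c : Int) : 0 ≤ pvBget b r c := by
  unfold pvBget
  cases hb : PySem.List.pyGet? b r with
  | none => simp [hb]
  | some row =>
    cases hc : PySem.List.pyGet? row c with
    | none => simp [hb, hc]
    | some x =>
      simp only [hb, hc, Option.bind_some, Option.getD_some]
      exact h row (PySem.List.mem_of_pyGet?_eq_some _ hb) x (PySem.List.mem_of_pyGet?_eq_some _ hc)

lemma pvIdim_bset {N : Int} {b : List (List Int)} (h : pvIdim N b) (r c v : Int) :
    pvIdim N (pvBset b r c v) := by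
  unfold pvBset
  cases hb : b[r.toNat]? with
  | none => exact h
  | some row =>
    refine ⟨by simpa using h.1, fun row' hrow' => ?_⟩
    rcases List.mem_or_eq_of_mem_set hrow' with hm | he
    · exact h.2 row' hm
    · rw [he]; simpa using h.2 row (List.mem_of_getElem? hb)

lemma pvNonneg_bset {b : List (List Int)} (h : pvNonneg b) {v : Int} (hv : 0 ≤ v) (r c : Int) :
    pvNonneg (pvBset b r c v) := by
  unfold pvBset
  cases hb : b[r.toNat]? with
  | none => exact h
  | some row =>
    intro row' hrow'
    rcases List.mem_or_eq_of_mem_set hrow' with hm | he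
    · exact h row' hm
    · rw [he]
      intro x hx
      rcases List.mem_or_eq_of_mem_set hx with hm2 | he2
      · exact h row (List.mem_of_getElem? hb) x hm2
      · omega

lemma pvBget_bset_self {N : Int} {b : List (List Int)} (hd : pvIdim N b) {r c : Int}
    (h : pvInb N (r, c)) (v : Int) : pvBget (pvBset b r c v) r c = v := by
  obtain ⟨h1, h2, h3, h4⟩ := h
  obtain ⟨hlen, hrows⟩ := hd
  have hrlt : r.toNat < b.length := by omega
  cases hb : b[r.toNat]? with
  | none => simp at hb; omega
  | some row =>
    have hrowlen : row.length = N.toNat := hrows row (List.mem_of_getElem? hb)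
    have hclt : c.toNat < row.length := by omega
    have hbset : pvBset b r c v = b.set r.toNat (row.set c.toNat v) := by unfold pvBset; rw [hb]
    unfold pvBget
    rw [hbset, pyGet?_nonneg_lt _ r h1 (by rw [List.length_set]; omega),
      List.getElem?_set_self hrlt]
    simp only [Option.bind_some]
    rw [pyGet?_nonneg_lt _ c h3 (by rw [List.length_set]; omega),
      List.getElem?_set_self hclt]
    rfl

lemma pvBget_bset_other {N : Int} {b : List (List Int)} (hd : pvIdim N b) {r c r' c' : Int}
    (h : pvInb N (r, c)) (h' : pvInb N (r', c')) (hne : (r', c') ≠ (r, c)) (v : Int) :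
    pvBget (pvBset b r c v) r' c' = pvBget b r' c' := by
  obtain ⟨h1, h2, h3, h4⟩ := h
  obtain ⟨h1', h2', h3', h4'⟩ := h'
  obtain ⟨hlen, hrows⟩ := hd
  have hrlt : r.toNat < b.length := by omega
  have hrlt' : r'.toNat < b.length := by omega
  cases hb : b[r.toNat]? with
  | none => simp at hb; omega
  | some row =>
    have hrowlen : row.length = N.toNat := hrows row (List.mem_of_getElem? hb)
    have hclt : c.toNat < row.length := by omega
    have hbset : pvBset b r c v = b.set r.toNat (row.set c.toNat v) := by unfold pvBset; rw [hb]
    unfold pvBget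
    rw [hbset, pyGet?_nonneg_lt _ r' h1' (by rw [List.length_set]; omega),
      pyGet?_nonneg_lt b r' h1' hrlt']
    by_cases hrr : r'.toNat = r.toNat
    · have : r' = r := by omega
      subst this
      have hcc : c'.toNat ≠ c.toNat := by
        intro hcn; exact hne (by simp [Prod.ext_iff]; omega)
      rw [hrr, List.getElem?_set_self hrlt, hb]
      simp only [Option.bind_some]
      rw [pyGet?_nonneg_lt _ c' h3' (by rw [List.length_set]; omega),
        pyGet?_nonneg_lt row c' h3' (by omega),
        List.getElem?_set_ne (fun hh => hcc hh.symm)]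
    · rw [List.getElem?_set_ne (fun hh => hrr hh.symm)]

lemma pvBget_bset_changed {N : Int} {b : List (List Int)} (hd : pvIdim N b) {r c : Int}
    (h : pvInb N (r, c)) (v : Int) (r' c' : Int)
    (hne : pvBget (pvBset b r c v) r' c' ≠ pvBget b r' c') :
    pvBget b r' c' = pvBget b r c ∧ pvBget (pvBset b r c v) r' c' = v := by
  rcases pvBget_bset_master hd h v r' c' with hs | hc
  · exact absurd hs hne
  · exact hc

lemma pvMonoEq_refl (b : List (List Int)) : pvMonoEq b b := fun _ _ _ => rfl

lemma pvMonoEq_trans {a b c : List (List Int)} (h1 : pvMonoEq a b) (h2 : pvMonoEq b c) :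
    pvMonoEq a c := by
  intro r cc h
  rw [h2 r cc (by rw [h1 r cc h]; exact h), h1 r cc h]

lemma pvMonoEq_bset {N : Int} {b : List (List Int)} (hd : pvIdim N b) {r c : Int}
    (h : pvInb N (r, c)) (hz : pvBget b r c = 0) (v : Int) : pvMonoEq b (pvBset b r c v) := by
  intro r' c' hne
  by_cases hch : pvBget (pvBset b r c v) r' c' = pvBget b r' c'
  · exact hch
  · exact absurd ((pvBget_bset_changed hd h v r' c' hch).1.trans hz) hne

lemma pvInert_mono {N : Int} {t : Int × Int} {b b' : List (List Int)} (hm : pvMonoEq b b')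
    {e : Int × Int} (h : pvInert N t b e) : pvInert N t b' e := by
  refine ⟨h.1, fun m hmem hinb => ?_⟩
  rw [hm _ _ (h.2 m hmem hinb)]
  exact h.2 m hmem hinb

lemma pvAug_mono {P P' : Int × Int → Prop} (h : ∀ e, P e → P' e) :
    ∀ {F Q : List (Int × Int)}, pvAug P F Q → pvAug P' F Q := by
  intro F Q hA
  induction hA with
  | nil => exact pvAug.nil
  | cons x _ ih => exact pvAug.cons x ih
  | extra e he _ ih => exact pvAug.extra e (h e he) ih

lemma pvAug_append {P : Int × Int → Prop} {F Q F' Q' : List (Int × Int)}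
    (h1 : pvAug P F Q) (h2 : pvAug P F' Q') : pvAug P (F ++ F') (Q ++ Q') := by
  induction h1 with
  | nil => exact h2
  | cons x _ ih => exact pvAug.cons x ih
  | extra e he _ ih => exact pvAug.extra e he ih

lemma pvAug_mem {P : Int × Int → Prop} {F Q : List (Int × Int)} (h : pvAug P F Q) :
    ∀ q ∈ Q, q ∈ F ∨ P q := by
  induction h with
  | nil => intro q hq; cases hq
  | cons x _ ih =>
    intro q hq
    rcases List.mem_cons.mp hq with h | h
    · exact Or.inl (h ▸ List.mem_cons_self)
    · rcases ih q h with h' | h'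
      · exact Or.inl (List.mem_cons_of_mem _ h')
      · exact Or.inr h'
  | extra e he _ ih =>
    intro q hq
    rcases List.mem_cons.mp hq with h | h
    · exact Or.inr (h ▸ he)
    · exact ih q h

lemma pvAug_length {P : Int × Int → Prop} {F Q : List (Int × Int)} (h : pvAug P F Q) :
    F.length ≤ Q.length := by
  induction h with
  | nil => simp
  | cons x _ ih => simpa using ih
  | extra e _ _ ih => simp; omega

lemma pvAug_nil_right {P : Int × Int → Prop} {F : List (Int × Int)} (h : pvAug P F []) : F = [] := by
  cases h; rfl

lemma pvAug_cons_inv {P : Int × Int → Prop} {F Q : List (Int × Int)} {q : Int × Int}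
    (h : pvAug P F (q :: Q)) :
    (∃ F', F = q :: F' ∧ pvAug P F' Q) ∨ (P q ∧ pvAug P F Q) := by
  cases h with
  | cons x h => exact Or.inl ⟨_, rfl, h⟩
  | extra e he h => exact Or.inr ⟨he, h⟩

lemma mem_pvGrid {N : Int} {p : Int × Int} : p ∈ pvGrid N ↔ pvInb N p := by
  unfold pvGrid pvInb
  constructor
  · intro h
    simp only [List.mem_map] at h
    obtain ⟨q, hq, rfl⟩ := h
    obtain ⟨a, b⟩ := q
    simp only [List.mem_product, List.mem_range] at hq
    constructor
    · positivity
    refine ⟨?_, by positivity, ?_⟩ <;> simp <;> omega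
  · rintro ⟨h1, h2, h3, h4⟩
    simp only [List.mem_map]
    refine ⟨(p.1.toNat, p.2.toNat), ?_, ?_⟩
    · rw [List.mem_product]
      simp only [List.mem_range]
      omega
    · simp [Prod.ext_iff]; omega

lemma nodup_pvGrid (N : Int) : (pvGrid N).Nodup := by
  refine List.Nodup.map ?_ (List.Nodup.product (List.nodup_range) (List.nodup_range))
  intro a b h
  simp only [Prod.ext_iff] at h ⊢
  omega

lemma pvU_bset {N : Int} {b : List (List Int)} (hd : pvIdim N b) {r c : Int}
    (h : pvInb N (r, c)) (hz : pvBget b r c = 0) {v : Int} (hv : v ≠ 0) :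
    pvU N (pvBset b r c v) + 1 = pvU N b := by
  have hmem : (r, c) ∈ pvGrid N := mem_pvGrid.mpr h
  have hperm := List.perm_cons_erase hmem
  unfold pvU
  rw [List.Perm.countP_eq _ hperm, List.Perm.countP_eq _ hperm]
  simp only [List.countP_cons]
  have hnew : pvBget (pvBset b r c v) r c = v := pvBget_bset_self hd h v
  have hold : pvBget b r c = 0 := hz
  have hrest : List.countP (fun p => pvBget (pvBset b r c v) p.1 p.2 == 0) ((pvGrid N).erase (r, c))
      = List.countP (fun p => pvBget b p.1 p.2 == 0) ((pvGrid N).erase (r, c)) := by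
    apply List.countP_congr
    intro x hx
    have hxne : x ≠ (r, c) := ((nodup_pvGrid N).mem_erase_iff.mp hx).1
    have hxg : x ∈ pvGrid N := ((nodup_pvGrid N).mem_erase_iff.mp hx).2
    have hxinb : pvInb N x := mem_pvGrid.mp hxg
    obtain ⟨x1, x2⟩ := x
    rw [pvBget_bset_other hd h hxinb (fun hcon => hxne hcon) v]
  rw [hrest]
  simp [hnew, hold, hz]
  omega

-- the remaining wave-fold is constant once `return` has fired
lemma pvBinner_inl (N r2 c2 : Int) (ms : List (Int × Int)) (r c : Int) (u : Unit) :
    ms.foldl (pvBinner N r2 c2 r c) (Sum.inl u) = Sum.inl u := by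
  induction ms with
  | nil => rfl
  | cons m ms ih => simpa [pvBinner] using ih

-- expansions that fail the bounds check on every move change nothing
lemma pvAexpandP_skip {N r c : Int} {b : List (List Int)} {q0 : List (Int × Int)}
    {ms : List (Int × Int)}
    (h : ∀ m ∈ ms, ¬(0 ≤ r + m.1 ∧ r + m.1 < N ∧ 0 ≤ c + m.2 ∧ c + m.2 < N)) :
    ms.foldl (pvAexpandP N r c) (b, q0) = (b, q0) := by
  induction ms with
  | nil => rfl
  | cons m ms ih =>
    simp only [List.foldl_cons]
    rw [show pvAexpandP N r c (b, q0) m = (b, q0) by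
      unfold pvAexpandP
      simp only []
      rw [if_neg (by
        intro hc0
        exact h m List.mem_cons_self ⟨hc0.1, hc0.2.1, hc0.2.2.1, hc0.2.2.2.1⟩)]]
    exact ih (fun m' hm' => h m' (List.mem_cons_of_mem _ hm'))

lemma pvBinner_skip {N r2 c2 r c : Int} {vis : PySem.Set (Int × Int)} {nxt : List (Int × Int)}
    {ms : List (Int × Int)}
    (h : ∀ m ∈ ms, ¬(0 ≤ r + m.1 ∧ r + m.1 < N ∧ 0 ≤ c + m.2 ∧ c + m.2 < N)) :
    ms.foldl (pvBinner N r2 c2 r c) (Sum.inr (vis, nxt)) = Sum.inr (vis, nxt) := by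
  induction ms with
  | nil => rfl
  | cons m ms ih =>
    simp only [List.foldl_cons]
    rw [show pvBinner N r2 c2 r c (Sum.inr (vis, nxt)) m = Sum.inr (vis, nxt) by
      unfold pvBinner
      simp only []
      rw [if_neg (by
        intro hc0
        exact h m List.mem_cons_self ⟨hc0.1, hc0.2.1, hc0.2.2.1, hc0.2.2.2.1⟩)]]
    exact ih (fun m' hm' => h m' (List.mem_cons_of_mem _ hm'))

-- an inert cell's expansion changes nothing
lemma pvInert_expand {N : Int} {t : Int × Int} {b : List (List Int)} {e : Int × Int}
    (h : pvInert N t b e) (q0 : List (Int × Int)) :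
    pvMoves.foldl (pvAexpandP N e.1 e.2) (b, q0) = (b, q0) := by
  have key : ∀ (ms : List (Int × Int)), (∀ m ∈ ms, m ∈ pvMoves) →
      ms.foldl (pvAexpandP N e.1 e.2) (b, q0) = (b, q0) := by
    intro ms
    induction ms with
    | nil => intro _; rfl
    | cons m ms ih =>
      intro hsub
      have hm := hsub m List.mem_cons_self
      have hcond : ¬(0 ≤ e.1 + m.1 ∧ e.1 + m.1 < N ∧ 0 ≤ e.2 + m.2 ∧ e.2 + m.2 < N ∧
          pvBget b (e.1 + m.1) (e.2 + m.2) = 0) := by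
        rintro ⟨a1, a2, a3, a4, a5⟩
        exact h.2 m hm ⟨a1, a2, a3, a4⟩ a5
      simp only [List.foldl_cons]
      rw [show pvAexpandP N e.1 e.2 (b, q0) m = (b, q0) by
        unfold pvAexpandP; simp only []; rw [if_neg hcond]]
      exact ih (fun x hx => hsub x (List.mem_cons_of_mem _ hx))
  exact key pvMoves (fun m hm => hm)

-- A's expansion fold in isolation: appends at the back, keeps dimensions, nonnegativity,
-- and every already-nonzero cell
lemma pvAfoldBasic {N : Int} (r c : Int) :
    ∀ (ms : List (Int × Int)) (b : List (List Int)) (q0 : List (Int × Int)),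
      pvIdim N b → pvNonneg b →
      ∃ b' Δ, ms.foldl (pvAexpandP N r c) (b, q0) = (b', q0 ++ Δ) ∧
        pvIdim N b' ∧ pvNonneg b' ∧ pvMonoEq b b' ∧ pvU N b' + Δ.length ≤ pvU N b := by
  intro ms
  induction ms with
  | nil => intro b q0 hd hn; exact ⟨b, [], by simp, hd, hn, pvMonoEq_refl b, by simp⟩
  | cons m ms ih =>
    intro b q0 hd hn
    simp only [List.foldl_cons]
    by_cases hcond : 0 ≤ r + m.1 ∧ r + m.1 < N ∧ 0 ≤ c + m.2 ∧ c + m.2 < N ∧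
        pvBget b (r + m.1) (c + m.2) = 0
    · rw [show pvAexpandP N r c (b, q0) m =
          (pvBset b (r + m.1) (c + m.2) (pvBget b r c + 1), q0 ++ [(r + m.1, c + m.2)]) by
        unfold pvAexpandP; simp only []; rw [if_pos hcond]]
      obtain ⟨hinb, hz⟩ : pvInb N (r + m.1, c + m.2) ∧ pvBget b (r + m.1) (c + m.2) = 0 :=
        ⟨⟨hcond.1, hcond.2.1, hcond.2.2.1, hcond.2.2.2.1⟩, hcond.2.2.2.2⟩
      have hv : (0:Int) ≤ pvBget b r c + 1 := by have := pvBget_nonneg hn r c; omega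
      obtain ⟨b', Δ, heq, hd', hn', hm', hu'⟩ := ih (pvBset b (r + m.1) (c + m.2) (pvBget b r c + 1))
        (q0 ++ [(r + m.1, c + m.2)]) (pvIdim_bset hd _ _ _) (pvNonneg_bset hn hv _ _)
      have hub : pvU N (pvBset b (r + m.1) (c + m.2) (pvBget b r c + 1)) + 1 = pvU N b :=
        pvU_bset hd hinb hz (by have := pvBget_nonneg hn r c; omega)
      exact ⟨b', (r + m.1, c + m.2) :: Δ, by simpa using heq, hd', hn',
        pvMonoEq_trans (pvMonoEq_bset hd hinb hz _) hm', by simp only [List.length_cons]; omega⟩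
    · rw [show pvAexpandP N r c (b, q0) m = (b, q0) by
        unfold pvAexpandP; simp only []; rw [if_neg hcond]]
      exact ih b q0 hd hn

-- once the target sits in the queue with its final mark, A returns that mark
lemma pvDrainTgt {N : Int} {t : Int × Int} {v : Int} (hv : v ≠ 0) :
    ∀ (Q1 : List (Int × Int)) (fuel : Nat) (b : List (List Int)) (Q2 : List (Int × Int)),
      pvIdim N b → pvNonneg b → (∀ q ∈ Q1, q ≠ t) → pvBget b t.1 t.2 = v →
      Q1.length + 1 ≤ fuel →
      pvAloop N t.1 t.2 fuel b (Q1 ++ t :: Q2) = v := by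
  intro Q1
  induction Q1 with
  | nil =>
    intro fuel b Q2 hd hn _ hv' hfuel
    obtain ⟨f, rfl⟩ : ∃ f, fuel = f + 1 := ⟨fuel - 1, by omega⟩
    obtain ⟨t1, t2⟩ := t
    simpa [pvAloop] using hv'
  | cons q Q1' ih =>
    intro fuel b Q2 hd hn hne hv' hfuel
    obtain ⟨f, rfl⟩ : ∃ f, fuel = f + 1 := ⟨fuel - 1, by omega⟩
    obtain ⟨q1, q2⟩ := q
    have hqt : ¬(q1 = t.1 ∧ q2 = t.2) := fun hq =>
      hne (q1, q2) List.mem_cons_self (by obtain ⟨a, b⟩ := t; simp_all)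
    simp only [List.cons_append, pvAloop, if_neg hqt]
    rw [pvAfold_eq]
    obtain ⟨b', Δ, heq, hd', hn', hm', _⟩ := pvAfoldBasic q1 q2 pvMoves b [] hd hn
    rw [heq]
    simp only [List.nil_append]
    have : (Q1' ++ t :: Q2) ++ Δ = Q1' ++ t :: (Q2 ++ Δ) := by simp
    rw [this]
    exact ih f b' (Q2 ++ Δ) hd' hn' (fun x hx => hne x (List.mem_cons_of_mem _ hx))
      (by rw [hm' t.1 t.2 (by rw [hv']; exact hv)]; exact hv') (by simp at hfuel ⊢; omega)

-- a queue of inert cells drains to -1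
lemma pvDrainInert {N : Int} {t : Int × Int} :
    ∀ (Q : List (Int × Int)) (fuel : Nat) (b : List (List Int)),
      (∀ e ∈ Q, pvInert N t b e) → Q.length + 1 ≤ fuel →
      pvAloop N t.1 t.2 fuel b Q = -1 := by
  intro Q
  induction Q with
  | nil =>
    intro fuel b _ hfuel
    obtain ⟨f, rfl⟩ : ∃ f, fuel = f + 1 := ⟨fuel - 1, by omega⟩
    rfl
  | cons q Q' ih =>
    intro fuel b hin hfuel
    obtain ⟨f, rfl⟩ : ∃ f, fuel = f + 1 := ⟨fuel - 1, by omega⟩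
    obtain ⟨q1, q2⟩ := q
    have hinq := hin (q1, q2) List.mem_cons_self
    have hqt : ¬(q1 = t.1 ∧ q2 = t.2) := fun hq =>
      hinq.1 (by obtain ⟨a, b⟩ := t; simp_all)
    simp only [pvAloop, if_neg hqt]
    rw [pvAfold_eq, pvInert_expand hinq]
    simp only [List.append_nil]
    exact ih f b (fun x hx => hin x (List.mem_cons_of_mem _ hx)) (by simp at hfuel ⊢; omega)
-- the per-cell expansion correspondence (the heart of the A-side equivalence)
lemma pvExp {N : Int} {s t : Int × Int} (hst : s ≠ t) (ht : pvInb N t) {r c : Int}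
    (hrc : pvInb N (r, c)) {d : Int} (hd0 : 0 ≤ d) :
    ∀ (ms : List (Int × Int)) (b : List (List Int)) (vis Gb Ga : List (Int × Int)),
      (∀ m ∈ ms, ¬(m.1 = 0 ∧ m.2 = 0)) →
      pvSInv N s t b vis →
      pvBget b r c = d →
      ((r, c) ≠ s → ∀ m ∈ pvMoves, pvInb N (s.1 + m.1, s.2 + m.2) →
        pvBget b (s.1 + m.1) (s.2 + m.2) ≠ 0) →
      ((∃ vis' Δb b' Δa,
          ms.foldl (pvBinner N t.1 t.2 r c) (Sum.inr (vis, Gb)) = Sum.inr (vis', Gb ++ Δb) ∧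
          vis' = vis ++ Δb ∧
          ms.foldl (pvAexpandP N r c) (b, Ga) = (b', Ga ++ Δa) ∧
          pvAug (pvInert N t b') Δb Δa ∧
          pvSInv N s t b' vis' ∧
          pvMonoEq b b' ∧
          pvBget b' r c = d ∧
          (∀ g ∈ Δb, pvInb N g ∧ pvBget b' g.1 g.2 = d + 1 ∧ g ∈ vis') ∧
          (∀ m ∈ ms, pvInb N (r + m.1, c + m.2) → pvBget b' (r + m.1) (c + m.2) ≠ 0) ∧
          pvU N b' + Δa.length ≤ pvU N b)
       ∨
       (∃ b' Δ1 Δ2,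
          ms.foldl (pvBinner N t.1 t.2 r c) (Sum.inr (vis, Gb)) = Sum.inl () ∧
          ms.foldl (pvAexpandP N r c) (b, Ga) = (b', Ga ++ Δ1 ++ t :: Δ2) ∧
          (∀ q ∈ Δ1, q ≠ t) ∧
          pvBget b' t.1 t.2 = d + 1 ∧
          pvIdim N b' ∧ pvNonneg b' ∧ pvMonoEq b b' ∧
          pvU N b' + Δ1.length + 1 ≤ pvU N b)) := by
  intro ms
  induction ms with
  | nil =>
    intro b vis Gb Ga _ hSI hbrc _
    exact Or.inl ⟨vis, [], b, [], by simp, by simp, by simp, pvAug.nil, hSI,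
      pvMonoEq_refl b, hbrc, by simp, by simp, by simp⟩
  | cons m ms ih =>
    intro b vis Gb Ga hms hSI hbrc hI3
    obtain ⟨hdim, hnn, hIV, hsvis, htvis⟩ := hSI
    have hm0 : ¬(m.1 = 0 ∧ m.2 = 0) := hms m List.mem_cons_self
    have hmsrest : ∀ m' ∈ ms, ¬(m'.1 = 0 ∧ m'.2 = 0) :=
      fun m' hm' => hms m' (List.mem_cons_of_mem _ hm')
    simp only [List.foldl_cons]
    by_cases hinb : pvInb N (r + m.1, c + m.2)
    · by_cases hpvis : (r + m.1, c + m.2) ∈ vis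
      · -- the candidate is already in the visited set
        have hBstep : pvBinner N t.1 t.2 r c (Sum.inr (vis, Gb)) m = Sum.inr (vis, Gb) := by
          unfold pvBinner
          simp only []
          rw [if_neg (by intro hcon; exact hcon.2.2.2.2 hpvis)]
        rw [hBstep]
        by_cases hbz : pvBget b (r + m.1) (c + m.2) = 0
        · -- A re-enqueues: by the invariant this cell must be the start
          have hps : (r + m.1, c + m.2) = s := by
            rcases (hIV _ hinb).mp hpvis with hnz | hs
            · exact absurd hbz hnz
            · exact hs
          have hrs : (r, c) ≠ s := by
            intro hc0
            rw [← hc0] at hps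
            exact hm0 (by
              have h1 : r + m.1 = r := congrArg Prod.fst hps
              have h2 : c + m.2 = c := congrArg Prod.snd hps
              omega)
          have hAstep : pvAexpandP N r c (b, Ga) m =
              (pvBset b (r + m.1) (c + m.2) (d + 1), Ga ++ [(r + m.1, c + m.2)]) := by
            unfold pvAexpandP
            simp only []
            rw [if_pos ⟨hinb.1, hinb.2.1, hinb.2.2.1, hinb.2.2.2, hbz⟩, hbrc]
          rw [hAstep]
          set b1 := pvBset b (r + m.1) (c + m.2) (d + 1) with hb1
          have hmono1 : pvMonoEq b b1 := pvMonoEq_bset hdim hinb hbz _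
          have hd1 : pvIdim N b1 := pvIdim_bset hdim _ _ _
          have hn1 : pvNonneg b1 := pvNonneg_bset hnn (by omega) _ _
          have hnewv : pvBget b1 (r + m.1) (c + m.2) = d + 1 := pvBget_bset_self hdim hinb _
          have hIV1 : ∀ p : Int × Int, pvInb N p → (p ∈ vis ↔ (pvBget b1 p.1 p.2 ≠ 0 ∨ p = s)) := by
            intro p hp
            by_cases hpe : p = (r + m.1, c + m.2)
            · subst hpe
              constructor
              · intro _; exact Or.inl (by rw [hnewv]; omega)
              · intro _; exact hpvis
            · obtain ⟨p1, p2⟩ := p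
              rw [pvBget_bset_other hdim hinb hp (fun hcon => hpe hcon) (d + 1)]
              exact hIV _ hp
          have hbrc1 : pvBget b1 r c = d := by
            rw [pvBget_bset_other hdim hinb hrc (by
              intro hcon
              exact hm0 (by
                have h1 : r = r + m.1 := congrArg Prod.fst hcon
                have h2 : c = c + m.2 := congrArg Prod.snd hcon
                omega)) (d + 1)]
            exact hbrc
          have hI31 : (r, c) ≠ s → ∀ m' ∈ pvMoves, pvInb N (s.1 + m'.1, s.2 + m'.2) →
              pvBget b1 (s.1 + m'.1) (s.2 + m'.2) ≠ 0 := by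
            intro h' m' hm' hinb'
            rw [hmono1 _ _ (hI3 h' m' hm' hinb')]
            exact hI3 h' m' hm' hinb'
          have hU1 : pvU N b1 + 1 = pvU N b := pvU_bset hdim hinb hbz (by omega)
          rcases ih b1 vis Gb (Ga ++ [(r + m.1, c + m.2)]) hmsrest
              ⟨hd1, hn1, hIV1, hsvis, htvis⟩ hbrc1 hI31 with
            ⟨vis', Δb, b', Δa, hBf, hvis', hAf, hAug, hSI', hmono', hbrc', hΔb, hNM, hU⟩ |
            ⟨b', Δ1, Δ2, hBf, hAf, hΔ1, hbt, hd', hn', hmono', hu'⟩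
          · refine Or.inl ⟨vis', Δb, b', (r + m.1, c + m.2) :: Δa, hBf, hvis', ?_, ?_, hSI',
              pvMonoEq_trans hmono1 hmono', hbrc', hΔb, ?_, ?_⟩
            · rw [hAf]; simp
            · refine pvAug.extra _ ?_ hAug
              rw [hps]
              refine ⟨hst, fun m' hm' hinb' => ?_⟩
              have hb0 : pvBget b (s.1 + m'.1) (s.2 + m'.2) ≠ 0 := hI3 hrs m' hm' hinb'
              rw [pvMonoEq_trans hmono1 hmono' _ _ hb0]
              exact hb0
            · intro m' hm'
              rcases List.mem_cons.mp hm' with rfl | hm''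
              · intro _
                rw [hmono' _ _ (by rw [hnewv]; omega)]
                rw [hnewv]; omega
              · exact hNM m' hm''
            · simp only [List.length_cons]
              omega
          · refine Or.inr ⟨b', (r + m.1, c + m.2) :: Δ1, Δ2, hBf, ?_, ?_, hbt, hd', hn',
              pvMonoEq_trans hmono1 hmono', by simp only [List.length_cons]; omega⟩
            · rw [hAf]; simp
            · intro q hq
              rcases List.mem_cons.mp hq with rfl | hq'
              · rw [hps]; exact hst
              · exact hΔ1 q hq'
        · -- already marked on A's board as well: both sides skip
          have hAstep : pvAexpandP N r c (b, Ga) m = (b, Ga) := by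
            unfold pvAexpandP
            simp only []
            rw [if_neg (by intro hcon; exact hbz hcon.2.2.2.2)]
          rw [hAstep]
          rcases ih b vis Gb Ga hmsrest ⟨hdim, hnn, hIV, hsvis, htvis⟩ hbrc hI3 with
            ⟨vis', Δb, b', Δa, hBf, hvis', hAf, hAug, hSI', hmono', hbrc', hΔb, hNM, hU⟩ |
            hfound
          · refine Or.inl ⟨vis', Δb, b', Δa, hBf, hvis', hAf, hAug, hSI', hmono', hbrc', hΔb, ?_, hU⟩
            intro m' hm'
            rcases List.mem_cons.mp hm' with rfl | hm''
            · intro _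
              rw [hmono' _ _ hbz]
              exact hbz
            · exact hNM m' hm''
          · exact Or.inr hfound
      · -- fresh cell: the wave appends too (or returns if it is the target)
        have hbz : pvBget b (r + m.1) (c + m.2) = 0 := by
          by_contra hnz
          exact hpvis ((hIV _ hinb).mpr (Or.inl hnz))
        have hps : (r + m.1, c + m.2) ≠ s := fun hc0 => hpvis (hc0 ▸ hsvis)
        have hAstep : pvAexpandP N r c (b, Ga) m =
            (pvBset b (r + m.1) (c + m.2) (d + 1), Ga ++ [(r + m.1, c + m.2)]) := by
          unfold pvAexpandP
          simp only []
          rw [if_pos ⟨hinb.1, hinb.2.1, hinb.2.2.1, hinb.2.2.2, hbz⟩, hbrc]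
        rw [hAstep]
        set b1 := pvBset b (r + m.1) (c + m.2) (d + 1) with hb1
        have hmono1 : pvMonoEq b b1 := pvMonoEq_bset hdim hinb hbz _
        have hd1 : pvIdim N b1 := pvIdim_bset hdim _ _ _
        have hn1 : pvNonneg b1 := pvNonneg_bset hnn (by omega) _ _
        have hnewv : pvBget b1 (r + m.1) (c + m.2) = d + 1 := pvBget_bset_self hdim hinb _
        have hU1 : pvU N b1 + 1 = pvU N b := pvU_bset hdim hinb hbz (by omega)
        by_cases hpt : (r + m.1, c + m.2) = t
        · -- the wave returns dist+1 here; A has just queued the target with its final mark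
          have hBstep : pvBinner N t.1 t.2 r c (Sum.inr (vis, Gb)) m = Sum.inl () := by
            unfold pvBinner
            simp only []
            rw [if_pos ⟨hinb.1, hinb.2.1, hinb.2.2.1, hinb.2.2.2, hpvis⟩, if_pos (by rw [hpt])]
          rw [hBstep, pvBinner_inl]
          obtain ⟨b', Δ, hAf, hd', hn', hmono', hu'⟩ :=
            pvAfoldBasic r c ms b1 (Ga ++ [(r + m.1, c + m.2)]) hd1 hn1
          refine Or.inr ⟨b', [], Δ, rfl, ?_, by simp, ?_, hd', hn', pvMonoEq_trans hmono1 hmono',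
            by simp only [List.length_nil]; omega⟩
          · rw [hAf, hpt]; simp
          · have : pvBget b1 t.1 t.2 = d + 1 := by rw [← hpt]; exact hnewv
            rw [hmono' _ _ (by rw [this]; omega)]
            exact this
        · -- both sides append the fresh cell
          have hvadd : PySem.Set.add vis (r + m.1, c + m.2) = vis ++ [(r + m.1, c + m.2)] := by
            unfold PySem.Set.add
            rw [if_neg (by simp only [PySem.Set.contains_eq_listContains, List.contains_eq_mem,
              decide_eq_true_eq]; exact hpvis)]
          have hBstep : pvBinner N t.1 t.2 r c (Sum.inr (vis, Gb)) m =
              Sum.inr (vis ++ [(r + m.1, c + m.2)], Gb ++ [(r + m.1, c + m.2)]) := by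
            unfold pvBinner
            simp only []
            rw [if_pos ⟨hinb.1, hinb.2.1, hinb.2.2.1, hinb.2.2.2, hpvis⟩, if_neg hpt, hvadd]
          rw [hBstep]
          set vis1 := vis ++ [(r + m.1, c + m.2)] with hv1
          have hIV1 : ∀ p : Int × Int, pvInb N p → (p ∈ vis1 ↔ (pvBget b1 p.1 p.2 ≠ 0 ∨ p = s)) := by
            intro p hp
            by_cases hpe : p = (r + m.1, c + m.2)
            · subst hpe
              constructor
              · intro _; exact Or.inl (by rw [hnewv]; omega)
              · intro _; simp [hv1]
            · obtain ⟨p1, p2⟩ := p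
              rw [pvBget_bset_other hdim hinb hp (fun hcon => hpe hcon) (d + 1)]
              rw [show ((p1, p2) ∈ vis1 ↔ (p1, p2) ∈ vis) from by
                simp only [hv1, List.mem_append, List.mem_singleton]
                exact ⟨fun h => h.elim id (fun h' => absurd h' hpe), Or.inl⟩]
              exact hIV _ hp
          have hbrc1 : pvBget b1 r c = d := by
            rw [pvBget_bset_other hdim hinb hrc (by
              intro hcon
              exact hm0 (by
                have h1 : r = r + m.1 := congrArg Prod.fst hcon
                have h2 : c = c + m.2 := congrArg Prod.snd hcon
                omega)) (d + 1)]
            exact hbrc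
          have hI31 : (r, c) ≠ s → ∀ m' ∈ pvMoves, pvInb N (s.1 + m'.1, s.2 + m'.2) →
              pvBget b1 (s.1 + m'.1) (s.2 + m'.2) ≠ 0 := by
            intro h' m' hm' hinb'
            rw [hmono1 _ _ (hI3 h' m' hm' hinb')]
            exact hI3 h' m' hm' hinb'
          have hsvis1 : s ∈ vis1 := by simp [hv1, hsvis]
          have htvis1 : t ∉ vis1 := by
            simp only [hv1, List.mem_append, List.mem_singleton]
            rintro (h | h)
            · exact htvis h
            · exact hpt h.symm
          rcases ih b1 vis1 (Gb ++ [(r + m.1, c + m.2)]) (Ga ++ [(r + m.1, c + m.2)]) hmsrest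
              ⟨hd1, hn1, hIV1, hsvis1, htvis1⟩ hbrc1 hI31 with
            ⟨vis', Δb, b', Δa, hBf, hvis', hAf, hAug, hSI', hmono', hbrc', hΔb, hNM, hU⟩ |
            ⟨b', Δ1, Δ2, hBf, hAf, hΔ1, hbt, hd', hn', hmono', hu'⟩
          · refine Or.inl ⟨vis', (r + m.1, c + m.2) :: Δb, b', (r + m.1, c + m.2) :: Δa, ?_, ?_,
              ?_, pvAug.cons _ hAug, hSI', pvMonoEq_trans hmono1 hmono', hbrc', ?_, ?_, ?_⟩
            · rw [hBf]; simp
            · rw [hvis', hv1]; simp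
            · rw [hAf]; simp
            · intro g hg
              rcases List.mem_cons.mp hg with rfl | hg'
              · refine ⟨hinb, ?_, ?_⟩
                · rw [hmono' _ _ (by rw [hnewv]; omega)]
                  exact hnewv
                · rw [hvis', hv1]; simp
              · exact hΔb g hg'
            · intro m' hm'
              rcases List.mem_cons.mp hm' with rfl | hm''
              · intro _
                rw [hmono' _ _ (by rw [hnewv]; omega)]
                rw [hnewv]; omega
              · exact hNM m' hm''
            · simp only [List.length_cons]
              omega
          · refine Or.inr ⟨b', (r + m.1, c + m.2) :: Δ1, Δ2, ?_, ?_, ?_, hbt, hd', hn',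
              pvMonoEq_trans hmono1 hmono', by simp only [List.length_cons]; omega⟩
            · exact hBf
            · rw [hAf]; simp
            · intro q hq
              rcases List.mem_cons.mp hq with rfl | hq'
              · exact hpt
              · exact hΔ1 q hq'
    · -- out of bounds: both sides skip
      have hBstep : pvBinner N t.1 t.2 r c (Sum.inr (vis, Gb)) m = Sum.inr (vis, Gb) := by
        unfold pvBinner
        simp only []
        rw [if_neg (by intro hcon; exact hinb ⟨hcon.1, hcon.2.1, hcon.2.2.1, hcon.2.2.2.1⟩)]
      have hAstep : pvAexpandP N r c (b, Ga) m = (b, Ga) := by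
        unfold pvAexpandP
        simp only []
        rw [if_neg (by intro hcon; exact hinb ⟨hcon.1, hcon.2.1, hcon.2.2.1, hcon.2.2.2.1⟩)]
      rw [hBstep, hAstep]
      rcases ih b vis Gb Ga hmsrest ⟨hdim, hnn, hIV, hsvis, htvis⟩ hbrc hI3 with
        ⟨vis', Δb, b', Δa, hBf, hvis', hAf, hAug, hSI', hmono', hbrc', hΔb, hNM, hU⟩ | hfound
      · refine Or.inl ⟨vis', Δb, b', Δa, hBf, hvis', hAf, hAug, hSI', hmono', hbrc', hΔb, ?_, hU⟩
        intro m' hm'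
        rcases List.mem_cons.mp hm' with rfl | hm''
        · intro hcon; exact absurd hcon hinb
        · exact hNM m' hm''
      · exact Or.inr hfound

-- the whole-frontier fold is constant once `return` has fired
lemma pvBstepFold_inl (N r2 c2 : Int) (F : List (Int × Int)) (u : Unit) :
    F.foldl (fun acc rc => pvMoves.foldl (pvBinner N r2 c2 rc.1 rc.2) acc) (Sum.inl u) =
      Sum.inl u := by
  induction F with
  | nil => rfl
  | cons f F ih => simpa [pvBinner_inl] using ih
-- processing the rest of the current level, with the partially built next level in hand
lemma pvLevel {N : Int} {s t : Int × Int} (hst : s ≠ t) (ht : pvInb N t) (fb : Nat) (d : Int)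
    (hd : 1 ≤ d)
    (IH : ∀ (d' : Int) (F Q : List (Int × Int)) (vis : List (Int × Int))
        (b : List (List Int)) (fuelA : Nat),
        1 ≤ d' →
        pvSInv N s t b vis →
        (∀ f ∈ F, pvInb N f ∧ pvBget b f.1 f.2 = d' ∧ f ∈ vis) →
        pvAug (pvInert N t b) F Q →
        (∀ m ∈ pvMoves, pvInb N (s.1 + m.1, s.2 + m.2) →
          pvBget b (s.1 + m.1) (s.2 + m.2) ≠ 0) →
        Q.length + 2 * pvU N b + 1 ≤ fuelA →
        pvU N b + 2 ≤ fb →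
        pvAloop N t.1 t.2 fuelA b Q = pvBloop N t.1 t.2 fb vis F d') :
    ∀ (Q F Gb Gq : List (Int × Int)) (vis : List (Int × Int)) (b : List (List Int))
      (fuelA : Nat),
      pvSInv N s t b vis →
      (∀ f ∈ F, pvInb N f ∧ pvBget b f.1 f.2 = d ∧ f ∈ vis) →
      (∀ g ∈ Gb, pvInb N g ∧ pvBget b g.1 g.2 = d + 1 ∧ g ∈ vis) →
      pvAug (pvInert N t b) F Q →
      pvAug (pvInert N t b) Gb Gq →
      (∀ m ∈ pvMoves, pvInb N (s.1 + m.1, s.2 + m.2) →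
        pvBget b (s.1 + m.1) (s.2 + m.2) ≠ 0) →
      (Q.length + Gq.length) + 2 * pvU N b + 1 ≤ fuelA →
      pvU N b + Gb.length + 1 ≤ fb →
      pvAloop N t.1 t.2 fuelA b (Q ++ Gq) =
        (match F.foldl (fun acc rc => pvMoves.foldl (pvBinner N t.1 t.2 rc.1 rc.2) acc)
            (Sum.inr (vis, Gb)) with
         | Sum.inl _ => d + 1
         | Sum.inr (vis', nxt) => pvBloop N t.1 t.2 fb vis' nxt (d + 1)) := by
  intro Q
  induction Q with
  | nil =>
    intro F Gb Gq vis b fuelA hSI hHF hHG hAugF hAugG hI3 hfa hfb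
    have hF : F = [] := pvAug_nil_right hAugF
    subst hF
    simp only [List.foldl_nil, List.nil_append]
    cases Gb with
    | nil =>
      have hin : ∀ e ∈ Gq, pvInert N t b e := by
        intro e he
        rcases pvAug_mem hAugG e he with h | h
        · cases h
        · exact h
      obtain ⟨f, rfl⟩ : ∃ f, fb = f + 1 := ⟨fb - 1, by omega⟩
      rw [pvDrainInert Gq fuelA b hin (by omega)]
      rfl
    | cons g Gb' =>
      exact IH (d + 1) (g :: Gb') Gq vis b fuelA (by omega) hSI hHG hAugG hI3
        (by omega) (by simp only [List.length_cons] at hfb; omega)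
  | cons q Q' ihQ =>
    intro F Gb Gq vis b fuelA hSI hHF hHG hAugF hAugG hI3 hfa hfb
    obtain ⟨fa, rfl⟩ : ∃ f, fuelA = f + 1 := ⟨fuelA - 1, by omega⟩
    rcases pvAug_cons_inv hAugF with ⟨F', rfl, hAugF'⟩ | ⟨hinert, hAugF'⟩
    · -- a genuine cell of the current level
      obtain ⟨q1, q2⟩ := q
      have hq := hHF (q1, q2) List.mem_cons_self
      have hqt : ¬(q1 = t.1 ∧ q2 = t.2) := by
        rintro ⟨h1, h2⟩
        exact hSI.2.2.2.2 (by
          have : t = (q1, q2) := by obtain ⟨a, b⟩ := t; simp_all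
          rw [this] at hSI ⊢
          exact hq.2.2)
      simp only [List.cons_append, pvAloop, if_neg hqt]
      rw [pvAfold_eq]
      simp only [List.foldl_cons]
      rcases pvExp hst ht hq.1 (by omega : (0:Int) ≤ d) pvMoves b vis Gb []
          (by decide) hSI hq.2.1 (fun _ => hI3) with
        ⟨vis', Δb, b', Δa, hBf, hvis', hAf, hAugΔ, hSI', hmono', _, hΔb, _, hU⟩ |
        ⟨b', Δ1, Δ2, hBf, hAf, hΔ1, hbt, hd', hn', hmono', hU⟩
      · rw [hAf, hBf]
        simp only [List.nil_append]
        have hlen : Δb.length ≤ Δa.length := pvAug_length hAugΔ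
        have step : (Q' ++ Gq) ++ Δa = Q' ++ (Gq ++ Δa) := by simp
        rw [step]
        refine ihQ F' (Gb ++ Δb) (Gq ++ Δa) vis' b' fa hSI' ?_ ?_
          (pvAug_mono (fun e he => pvInert_mono hmono' he) hAugF') ?_ ?_ ?_ ?_
        · intro f hf
          have hff := hHF f (List.mem_cons_of_mem _ hf)
          refine ⟨hff.1, ?_, ?_⟩
          · rw [hmono' _ _ (by rw [hff.2.1]; omega)]
            exact hff.2.1
          · rw [hvis']
            exact List.mem_append_left _ hff.2.2
        · intro g hg
          rcases List.mem_append.mp hg with hg' | hg'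
          · have hgg := hHG g hg'
            refine ⟨hgg.1, ?_, ?_⟩
            · rw [hmono' _ _ (by rw [hgg.2.1]; omega)]
              exact hgg.2.1
            · rw [hvis']
              exact List.mem_append_left _ hgg.2.2
          · exact hΔb g hg'
        · exact pvAug_append (pvAug_mono (fun e he => pvInert_mono hmono' he) hAugG) hAugΔ
        · intro m hm hinb
          rw [hmono' _ _ (hI3 m hm hinb)]
          exact hI3 m hm hinb
        · simp only [List.length_append, List.length_cons] at hfa ⊢
          omega
        · simp only [List.length_append, List.length_cons] at hfb ⊢
          omega
      · -- the target was generated while expanding this cell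
        rw [hAf, hBf, pvBstepFold_inl]
        simp only [List.nil_append]
        have step : (Q' ++ Gq) ++ (Δ1 ++ t :: Δ2) = (Q' ++ Gq ++ Δ1) ++ t :: Δ2 := by simp
        rw [step]
        refine pvDrainTgt (by omega : d + 1 ≠ 0) (Q' ++ Gq ++ Δ1) fa b' Δ2 hd' hn' ?_ hbt ?_
        · intro x hx
          rcases List.mem_append.mp hx with hx' | hx'
          · rcases List.mem_append.mp hx' with hx'' | hx''
            · intro hc0
              rcases pvAug_mem hAugF' x hx'' with hmem | hin
              · exact hSI.2.2.2.2 (hc0 ▸ (hHF x (List.mem_cons_of_mem _ hmem)).2.2)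
              · exact hin.1 hc0
            · intro hc0
              rcases pvAug_mem hAugG x hx'' with hmem | hin
              · exact hSI.2.2.2.2 (hc0 ▸ (hHG x hmem).2.2)
              · exact hin.1 hc0
          · exact hΔ1 x hx'
        · simp only [List.length_append, List.length_cons] at hfa ⊢
          omega
    · -- an inert extra (the re-enqueued start): popping it changes nothing
      obtain ⟨q1, q2⟩ := q
      have hqt : ¬(q1 = t.1 ∧ q2 = t.2) := fun hq =>
        hinert.1 (by obtain ⟨hq1, hq2⟩ := hq; subst hq1; subst hq2; rfl)
      simp only [List.cons_append, pvAloop, if_neg hqt]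
      rw [pvAfold_eq, pvInert_expand hinert]
      simp only [List.append_nil]
      exact ihQ F Gb Gq vis b fa hSI hHF hHG hAugF' hAugG hI3
        (by simp only [List.length_cons] at hfa; omega) hfb

-- the level-by-level simulation of A's queue by the reference wave loop
lemma pvMain {N : Int} {s t : Int × Int} (hst : s ≠ t) (ht : pvInb N t) :
    ∀ (fuelB : Nat) (d : Int) (F Q : List (Int × Int)) (vis : List (Int × Int))
      (b : List (List Int)) (fuelA : Nat),
      1 ≤ d →
      pvSInv N s t b vis →
      (∀ f ∈ F, pvInb N f ∧ pvBget b f.1 f.2 = d ∧ f ∈ vis) →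
      pvAug (pvInert N t b) F Q →
      (∀ m ∈ pvMoves, pvInb N (s.1 + m.1, s.2 + m.2) → pvBget b (s.1 + m.1) (s.2 + m.2) ≠ 0) →
      Q.length + 2 * pvU N b + 1 ≤ fuelA →
      pvU N b + 2 ≤ fuelB →
      pvAloop N t.1 t.2 fuelA b Q = pvBloop N t.1 t.2 fuelB vis F d := by
  intro fuelB
  induction fuelB using Nat.strong_induction_on with
  | _ fuelB IHs =>
    intro d F Q vis b fuelA hd hSI hHF hAug hI3 hfa hfb
    obtain ⟨fb, rfl⟩ : ∃ f, fuelB = f + 1 := ⟨fuelB - 1, by omega⟩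
    cases F with
    | nil =>
      have hin : ∀ e ∈ Q, pvInert N t b e := by
        intro e he
        rcases pvAug_mem hAug e he with h | h
        · cases h
        · exact h
      rw [pvDrainInert Q fuelA b hin (by omega)]
      rfl
    | cons f F' =>
      have hlev := pvLevel hst ht fb d hd
        (fun d' F Q vis b fuelA hd' hSI' hHF' hAug' hI3' hfa' hfb' =>
          IHs fb (by omega) d' F Q vis b fuelA hd' hSI' hHF' hAug' hI3' hfa' hfb')
        Q (f :: F') [] [] vis b fuelA hSI hHF (by intro g hg; cases hg) hAug pvAug.nil hI3
        (by simpa using hfa) (by simpa using hfb)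
      rw [List.append_nil] at hlev
      rw [hlev]
      simp only [pvBloop, pvBstep]

-- the freshly initialised board of A reads 0 everywhere
lemma pvBget_init (n : Nat) (r c : Int) :
    pvBget (List.replicate n (List.replicate n (0 : Int))) r c = 0 := by
  unfold pvBget
  cases hb : PySem.List.pyGet? (List.replicate n (List.replicate n (0 : Int))) r with
  | none => simp [hb]
  | some row =>
    have hrow := List.eq_of_mem_replicate (PySem.List.mem_of_pyGet?_eq_some _ hb)
    subst hrow
    cases hc : PySem.List.pyGet? (List.replicate n (0 : Int)) c with
    | none => simp [hb, hc]
    | some x =>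
      have hx := List.eq_of_mem_replicate (PySem.List.mem_of_pyGet?_eq_some _ hc)
      simp [hb, hc, hx]

lemma pvIdim_init (N : Int) : pvIdim N (List.replicate N.toNat (List.replicate N.toNat (0 : Int))) := by
  constructor
  · simp
  · intro row hrow
    simp_all [List.eq_of_mem_replicate hrow]

lemma pvU_init (N : Int) : pvU N (List.replicate N.toNat (List.replicate N.toNat (0 : Int))) = N.toNat * N.toNat := by
  unfold pvU
  rw [List.countP_eq_length.mpr (fun p _ => by simp [pvBget_init])]
  unfold pvGrid
  rw [List.length_map, List.length_product]
  simp

-- A equals the reference wave loop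
lemma pvA_eq_level (N : Int) (r1 : Int) (c1 : Int) (r2 : Int) (c2 : Int)
    (hPre : Pre_BFS N r1 c1 r2 c2) : BFS N r1 c1 r2 c2 = pvLevelBFS N r1 c1 r2 c2 := by
  unfold BFS pvLevelBFS
  rcases hPre with ⟨h1, h2, h3, h4, h5, h6, h7, h8⟩ | ⟨hne, hn1, hn2, hn3, hn4, hn5, hn6⟩
  case inr =>
    -- the start square has no on-board neighbour and is not the target: both sides return -1
    have hno : ∀ m ∈ pvMoves, ¬(0 ≤ r1 + m.1 ∧ r1 + m.1 < N ∧ 0 ≤ c1 + m.2 ∧ c1 + m.2 < N) := by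
      intro m hm
      simp only [pvMoves, List.mem_cons, List.not_mem_nil, or_false] at hm
      rcases hm with rfl | rfl | rfl | rfl | rfl | rfl <;> simp only [] <;> omega
    rw [if_neg hne]
    show pvAloop N r2 c2 ((2 * (N.toNat * N.toNat) + 1) + 1) _ [(r1, c1)] =
      pvBloop N r2 c2 ((N.toNat * N.toNat + 1) + 1) (PySem.Set.ofList [(r1, c1)]) [(r1, c1)] 0
    simp only [pvAloop, if_neg hne]
    rw [pvAfold_eq, pvAexpandP_skip hno]
    conv_rhs => rw [pvBloop]
    simp only [pvBstep, List.foldl_cons, List.foldl_nil]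
    rw [pvBinner_skip hno]
    simp only [List.nil_append, pvAloop, pvBloop]
  have hN1 : 1 ≤ N.toNat := by omega
  have hX1 : 1 ≤ N.toNat * N.toNat := by
    have := Nat.mul_le_mul hN1 hN1
    simpa using this
  by_cases hstart : r1 = r2 ∧ c1 = c2
  · rw [if_pos hstart]
    show pvAloop N r2 c2 ((2 * (N.toNat * N.toNat) + 1) + 1) _ [(r1, c1)] = 0
    simp only [pvAloop, if_pos hstart]
    exact pvBget_init _ r1 c1
  · rw [if_neg hstart]
    have hst : ((r1, c1) : Int × Int) ≠ (r2, c2) := by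
      intro hc0; exact hstart ⟨congrArg Prod.fst hc0, congrArg Prod.snd hc0⟩
    have ht : pvInb N (r2, c2) := ⟨h5, h6, h7, h8⟩
    have hs : pvInb N (r1, c1) := ⟨h1, h2, h3, h4⟩
    set b0 := List.replicate N.toNat (List.replicate N.toNat (0 : Int)) with hb0
    have hdim0 : pvIdim N b0 := pvIdim_init N
    have hnn0 : pvNonneg b0 := by
      intro row hrow x hx
      rw [List.eq_of_mem_replicate hrow] at hx
      rw [List.eq_of_mem_replicate hx]
    have hvis0 : PySem.Set.ofList [((r1 : Int), c1)] = [((r1 : Int), c1)] := rfl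
    have hSI0 : pvSInv N (r1, c1) (r2, c2) b0 [(r1, c1)] := by
      refine ⟨hdim0, hnn0, ?_, List.mem_singleton.mpr rfl, ?_⟩
      · intro p _
        rw [pvBget_init]
        simp
      · rw [List.mem_singleton]
        exact fun hc0 => hst hc0.symm
    show pvAloop N r2 c2 ((2 * (N.toNat * N.toNat) + 1) + 1) b0 [(r1, c1)] =
      pvBloop N r2 c2 ((N.toNat * N.toNat + 1) + 1) (PySem.Set.ofList [(r1, c1)]) [(r1, c1)] 0
    simp only [pvAloop, if_neg hstart]
    rw [pvAfold_eq]
    rcases pvExp hst ht hs (le_refl (0 : Int)) pvMoves b0 [(r1, c1)] [] []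
        (by decide) hSI0 (pvBget_init _ r1 c1) (fun h => absurd rfl h) with
      ⟨vis', Δb, b', Δa, hBf, hvis', hAf, hAugΔ, hSI', hmono', _, hΔb, hNM, hU⟩ |
      ⟨b', Δ1, Δ2, hBf, hAf, hΔ1, hbt, hd', hn', hmono', hU⟩
    · rw [hAf]
      simp only [List.nil_append]
      rw [pvU_init] at hU
      conv_rhs => rw [pvBloop]
      simp only [pvBstep, List.foldl_cons, List.foldl_nil, hvis0]
      rw [hBf]
      simp only [List.nil_append]
      cases Δb with
      | nil =>
        have hin : ∀ e ∈ Δa, pvInert N (r2, c2) b' e := by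
          intro e he
          rcases pvAug_mem hAugΔ e he with h | h
          · cases h
          · exact h
        rw [pvDrainInert Δa (2 * (N.toNat * N.toNat) + 1) b' hin (by omega)]
        rfl
      | cons g Δb' =>
        have hlen : (g :: Δb').length ≤ Δa.length := pvAug_length hAugΔ
        simp only [List.length_cons] at hlen
        have := pvMain hst ht (N.toNat * N.toNat + 1) 1 (g :: Δb') Δa vis' b'
          (2 * (N.toNat * N.toNat) + 1) (le_refl 1) hSI'
          (by
            intro f hf
            have := hΔb f hf
            exact ⟨this.1, by rw [this.2.1]; norm_num, this.2.2⟩)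
          hAugΔ
          (fun m hm hinb => hNM m hm hinb)
          (by omega) (by omega)
        rw [this]
        norm_num
    · rw [hAf]
      simp only [List.nil_append]
      rw [pvU_init] at hU
      conv_rhs => rw [pvBloop]
      simp only [pvBstep, List.foldl_cons, List.foldl_nil, hvis0]
      rw [hBf]
      rw [pvDrainTgt (by norm_num : (0 : Int) + 1 ≠ 0) Δ1 (2 * (N.toNat * N.toNat) + 1) b' Δ2
        hd' hn' hΔ1 hbt (by omega)]
-- ===== the wave loop equals B's value iteration =====

-- count of unlabelled cells on B's grid (termination measure for the sweeps)
def pvUV (N : Int) (g : List (List Int)) : Nat :=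
  (pvGrid N).countP (fun p => pvBget g p.1 p.2 == -1)

-- "cell p gets labelled d by a sweep of g": unlabelled with a predecessor labelled d-1
def pvLab (N d : Int) (g : List (List Int)) (p : Int × Int) : Prop :=
  pvBget g p.1 p.2 = -1 ∧
  ∃ m ∈ pvPreds, pvInb N (p.1 + m.1, p.2 + m.2) ∧ pvBget g (p.1 + m.1) (p.2 + m.2) = d - 1

lemma length_pvGrid (N : Int) : (pvGrid N).length = N.toNat * N.toNat := by
  unfold pvGrid
  rw [List.length_map, List.length_product]
  simp

lemma pvUV_le (N : Int) (g : List (List Int)) : pvUV N g ≤ N.toNat * N.toNat := by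
  calc pvUV N g ≤ (pvGrid N).length := List.countP_le_length
    _ = N.toNat * N.toNat := length_pvGrid N

lemma pvUV_lt {N : Int} {g g' : List (List Int)}
    (hmono : ∀ p : Int × Int, pvInb N p → pvBget g' p.1 p.2 = -1 → pvBget g p.1 p.2 = -1)
    {p₀ : Int × Int} (h0 : pvInb N p₀) (hg : pvBget g p₀.1 p₀.2 = -1)
    (hg' : pvBget g' p₀.1 p₀.2 ≠ -1) : pvUV N g' < pvUV N g := by
  have hmem : p₀ ∈ pvGrid N := mem_pvGrid.mpr h0
  have hperm := List.perm_cons_erase hmem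
  unfold pvUV
  rw [List.Perm.countP_eq _ hperm, List.Perm.countP_eq _ hperm]
  simp only [List.countP_cons]
  have hrest : List.countP (fun p => pvBget g' p.1 p.2 == -1) ((pvGrid N).erase p₀)
      ≤ List.countP (fun p => pvBget g p.1 p.2 == -1) ((pvGrid N).erase p₀) := by
    apply List.countP_mono_left
    intro x hx
    have hxinb : pvInb N x := mem_pvGrid.mp (List.mem_of_mem_erase hx)
    simp only [beq_iff_eq]
    exact hmono x hxinb
  simp only [beq_iff_eq]
  rw [if_pos hg, if_neg hg']
  omega

-- the fresh -1 grid reads -1 on every board cell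
lemma pvBget_repm {N : Int} {r c : Int} (h : pvInb N (r, c)) :
    pvBget (List.replicate N.toNat (List.replicate N.toNat (-1 : Int))) r c = -1 := by
  obtain ⟨h1, h2, h3, h4⟩ := h
  unfold pvBget
  rw [pyGet?_nonneg_lt _ r h1 (by simp; omega)]
  rw [List.getElem?_replicate, if_pos (by omega)]
  simp only [Option.bind_some]
  rw [pyGet?_nonneg_lt _ c h3 (by simp; omega)]
  rw [List.getElem?_replicate, if_pos (by omega)]
  rfl

lemma pvIdim_repm (N : Int) :
    pvIdim N (List.replicate N.toNat (List.replicate N.toNat (-1 : Int))) := by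
  constructor
  · simp
  · intro row hrow
    simp_all [List.eq_of_mem_replicate hrow]

lemma pvNegPred : ∀ m ∈ pvPreds, ((-m.1, -m.2) : Int × Int) ∈ pvMoves := by decide

lemma pvNegMove : ∀ m ∈ pvMoves, ((-m.1, -m.2) : Int × Int) ∈ pvPreds := by decide

-- reducing one cell of the sweep
lemma pvCell_pos {N d : Int} {g : List (List Int)} {ch : Bool} {p : Int × Int}
    (hC : pvLab N d g p) : pvCell N d (g, ch) p = (pvBset g p.1 p.2 d, true) := by
  obtain ⟨h1, m, hm, hinb, hv⟩ := hC
  unfold pvCell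
  rw [if_pos]
  refine ⟨h1, ?_⟩
  rw [List.any_eq_true]
  refine ⟨m, hm, ?_⟩
  rw [decide_eq_true_eq]
  obtain ⟨a1, a2, a3, a4⟩ := hinb
  exact ⟨a1, a2, a3, a4, hv⟩

lemma pvCell_neg {N d : Int} {g : List (List Int)} {ch : Bool} {p : Int × Int}
    (hC : ¬ pvLab N d g p) : pvCell N d (g, ch) p = (g, ch) := by
  unfold pvCell
  rw [if_neg]
  rintro ⟨h1, h2⟩
  rw [List.any_eq_true] at h2
  obtain ⟨m, hm, hmv⟩ := h2
  rw [decide_eq_true_eq] at hmv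
  exact hC ⟨h1, m, hm, ⟨hmv.1, hmv.2.1, hmv.2.2.1, hmv.2.2.2.1⟩, hmv.2.2.2.2⟩

-- the sweep fold, cell by cell: values judged on the pre-sweep grid (in-place writes of d are
-- invisible to the `= d-1` predecessor tests because d ≥ 1)
lemma pvSweepFold {N d : Int} (hd : 1 ≤ d) (g₀ : List (List Int)) :
    ∀ (L : List (Int × Int)) (g : List (List Int)) (ch : Bool),
      pvIdim N g → L.Nodup → (∀ p ∈ L, pvInb N p) →
      (∀ p ∈ L, pvBget g p.1 p.2 = pvBget g₀ p.1 p.2) →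
      (∀ q : Int × Int, pvInb N q → (pvBget g q.1 q.2 = d - 1 ↔ pvBget g₀ q.1 q.2 = d - 1)) →
      pvIdim N (L.foldl (pvCell N d) (g, ch)).1 ∧
      (∀ p ∈ L, (pvLab N d g₀ p → pvBget (L.foldl (pvCell N d) (g, ch)).1 p.1 p.2 = d) ∧
        (¬ pvLab N d g₀ p →
          pvBget (L.foldl (pvCell N d) (g, ch)).1 p.1 p.2 = pvBget g₀ p.1 p.2)) ∧
      (∀ q : Int × Int, pvInb N q → q ∉ L →
        pvBget (L.foldl (pvCell N d) (g, ch)).1 q.1 q.2 = pvBget g q.1 q.2) ∧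
      ((L.foldl (pvCell N d) (g, ch)).2 = true ↔ ch = true ∨ ∃ p ∈ L, pvLab N d g₀ p) := by
  intro L
  induction L with
  | nil =>
    intro g ch hdim _ _ _ _
    refine ⟨hdim, by simp, by simp, by simp⟩
  | cons p L' ih =>
    intro g ch hdim hnd hin hsame hiff
    have hpin : pvInb N p := hin p List.mem_cons_self
    have hpL' : p ∉ L' := (List.nodup_cons.mp hnd).1
    have hbridge : pvLab N d g p ↔ pvLab N d g₀ p := by
      unfold pvLab
      rw [hsame p List.mem_cons_self]
      constructor
      · rintro ⟨h1, m, hm, hinb, hv⟩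
        exact ⟨h1, m, hm, hinb, (hiff _ hinb).mp hv⟩
      · rintro ⟨h1, m, hm, hinb, hv⟩
        exact ⟨h1, m, hm, hinb, (hiff _ hinb).mpr hv⟩
    simp only [List.foldl_cons]
    by_cases hC : pvLab N d g₀ p
    · rw [pvCell_pos (hbridge.mpr hC)]
      set g1 := pvBset g p.1 p.2 d with hg1
      have hd1 : pvIdim N g1 := pvIdim_bset hdim _ _ _
      have hself : pvBget g1 p.1 p.2 = d := by
        have := pvBget_bset_self (b := g) hdim (r := p.1) (c := p.2) (by
          obtain ⟨a1, a2, a3, a4⟩ := hpin; exact ⟨a1, a2, a3, a4⟩) d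
        exact this
      have hother : ∀ q : Int × Int, pvInb N q → q ≠ p → pvBget g1 q.1 q.2 = pvBget g q.1 q.2 := by
        intro q hq hqp
        exact pvBget_bset_other hdim (by obtain ⟨a1,a2,a3,a4⟩ := hpin; exact ⟨a1,a2,a3,a4⟩)
          (by obtain ⟨a1,a2,a3,a4⟩ := hq; exact ⟨a1,a2,a3,a4⟩)
          (by intro h; exact hqp (by obtain ⟨q1,q2⟩ := q; obtain ⟨p1,p2⟩ := p; exact h)) d
      obtain ⟨ihdim, ihvals, ihout, ihch⟩ := ih g1 true hd1 (List.nodup_cons.mp hnd).2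
        (fun q hq => hin q (List.mem_cons_of_mem _ hq))
        (fun q hq => by
          rw [hother q (hin q (List.mem_cons_of_mem _ hq)) (fun h => hpL' (h ▸ hq))]
          exact hsame q (List.mem_cons_of_mem _ hq))
        (fun q hq => by
          by_cases hqp : q = p
          · subst hqp
            rw [hself]
            constructor
            · intro h; omega
            · intro h
              have := (hiff q hq).mpr h
              rw [hsame q List.mem_cons_self] at this
              rw [hC.1] at this
              omega
          · rw [hother q hq hqp]
            exact hiff q hq)
      refine ⟨ihdim, ?_, ?_, ?_⟩
      · intro q hq
        rcases List.mem_cons.mp hq with rfl | hq'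
        · refine ⟨fun _ => ?_, fun hnc => absurd hC hnc⟩
          rw [ihout q hpin hpL']
          exact hself
        · exact ihvals q hq'
      · intro q hq hqn
        rw [ihout q hq (fun h => hqn (List.mem_cons_of_mem _ h)),
          hother q hq (fun h => hqn (h ▸ List.mem_cons_self))]
      · rw [ihch]
        constructor
        · intro _; exact Or.inr ⟨p, List.mem_cons_self, hC⟩
        · intro _; exact Or.inl rfl
    · rw [pvCell_neg (fun h => hC (hbridge.mp h))]
      obtain ⟨ihdim, ihvals, ihout, ihch⟩ := ih g ch hdim (List.nodup_cons.mp hnd).2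
        (fun q hq => hin q (List.mem_cons_of_mem _ hq))
        (fun q hq => hsame q (List.mem_cons_of_mem _ hq)) hiff
      refine ⟨ihdim, ?_, ?_, ?_⟩
      · intro q hq
        rcases List.mem_cons.mp hq with rfl | hq'
        · refine ⟨fun h => absurd h hC, fun _ => ?_⟩
          rw [ihout q hpin hpL']
          exact hsame q List.mem_cons_self
        · exact ihvals q hq'
      · intro q hq hqn
        exact ihout q hq (fun h => hqn (List.mem_cons_of_mem _ h))
      · rw [ihch]
        constructor
        · rintro (h | ⟨q, hq, hql⟩)
          · exact Or.inl h
          · exact Or.inr ⟨q, List.mem_cons_of_mem _ hq, hql⟩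
        · rintro (h | ⟨q, hq, hql⟩)
          · exact Or.inl h
          · rcases List.mem_cons.mp hq with rfl | hq'
            · exact absurd hql hC
            · exact Or.inr ⟨q, hq', hql⟩

-- the whole sweep, against the pre-sweep grid
lemma pvSweep_spec {N d : Int} (hd : 1 ≤ d) (g : List (List Int)) (hdim : pvIdim N g) :
    pvIdim N (pvSweep N d g).1 ∧
    (∀ p : Int × Int, pvInb N p →
      (pvLab N d g p → pvBget (pvSweep N d g).1 p.1 p.2 = d) ∧
      (¬ pvLab N d g p → pvBget (pvSweep N d g).1 p.1 p.2 = pvBget g p.1 p.2)) ∧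
    ((pvSweep N d g).2 = true ↔ ∃ p : Int × Int, pvInb N p ∧ pvLab N d g p) := by
  obtain ⟨hdim', hvals, _, hch⟩ := pvSweepFold hd g (pvGrid N) g false hdim (nodup_pvGrid N)
    (fun p hp => mem_pvGrid.mp hp) (fun _ _ => rfl) (fun _ _ => Iff.rfl)
  unfold pvSweep
  refine ⟨hdim', ?_, ?_⟩
  · intro p hp
    exact hvals p (mem_pvGrid.mpr hp)
  · rw [hch]
    constructor
    · rintro (h | ⟨p, hp, hl⟩)
      · cases h
      · exact ⟨p, mem_pvGrid.mp hp, hl⟩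
    · rintro ⟨p, hp, hl⟩
      exact Or.inr ⟨p, mem_pvGrid.mpr hp, hl⟩
-- one frontier cell's six candidate moves, characterised as a set extension (or a hit on t)
lemma pvBinnerChar {N : Int} {t : Int × Int} (r c : Int) :
    ∀ (ms : List (Int × Int)) (vis : PySem.Set (Int × Int)) (G : List (Int × Int)),
      t ∉ vis →
      ((∃ m ∈ ms, pvInb N (r + m.1, c + m.2) ∧ (r + m.1, c + m.2) = t) →
        ms.foldl (pvBinner N t.1 t.2 r c) (Sum.inr (vis, G)) = Sum.inl ()) ∧
      (¬(∃ m ∈ ms, pvInb N (r + m.1, c + m.2) ∧ (r + m.1, c + m.2) = t) →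
        ∃ Δ : List (Int × Int),
          ms.foldl (pvBinner N t.1 t.2 r c) (Sum.inr (vis, G)) = Sum.inr (vis ++ Δ, G ++ Δ) ∧
          (∀ p : Int × Int,
            p ∈ Δ ↔ (p ∉ vis ∧ pvInb N p ∧ ∃ m ∈ ms, p = (r + m.1, c + m.2)))) := by
  intro ms
  induction ms with
  | nil =>
    intro vis G htv
    constructor
    · rintro ⟨m, hm, _⟩
      exact absurd hm List.not_mem_nil
    · intro _
      exact ⟨[], by simp, by simp⟩
  | cons m ms ih =>
    intro vis G htv
    simp only [List.foldl_cons]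
    by_cases hinb : pvInb N (r + m.1, c + m.2)
    · by_cases hct : (r + m.1, c + m.2) = t
      · have hstep : pvBinner N t.1 t.2 r c (Sum.inr (vis, G)) m = Sum.inl () := by
          unfold pvBinner
          simp only []
          rw [if_pos ⟨hinb.1, hinb.2.1, hinb.2.2.1, hinb.2.2.2, by rw [hct]; exact htv⟩,
            if_pos (by rw [hct])]
        rw [hstep, pvBinner_inl]
        exact ⟨fun _ => rfl, fun hno => absurd ⟨m, List.mem_cons_self, hinb, hct⟩ hno⟩
      · by_cases hv : (r + m.1, c + m.2) ∈ vis
        · have hstep : pvBinner N t.1 t.2 r c (Sum.inr (vis, G)) m = Sum.inr (vis, G) := by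
            unfold pvBinner
            simp only []
            rw [if_neg (by intro hcon; exact hcon.2.2.2.2 hv)]
          rw [hstep]
          obtain ⟨ih1, ih2⟩ := ih vis G htv
          refine ⟨?_, ?_⟩
          · rintro ⟨m', hm', hinb', heq'⟩
            rcases List.mem_cons.mp hm' with rfl | hm''
            · exact absurd heq' hct
            · exact ih1 ⟨m', hm'', hinb', heq'⟩
          · intro hno
            obtain ⟨Δ, hΔ, hmem⟩ := ih2 (fun ⟨m', hm', hinb', heq'⟩ =>
              hno ⟨m', List.mem_cons_of_mem _ hm', hinb', heq'⟩)
            refine ⟨Δ, hΔ, fun p => ?_⟩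
            rw [hmem p]
            constructor
            · rintro ⟨h1, h2, m', hm', h3⟩
              exact ⟨h1, h2, m', List.mem_cons_of_mem _ hm', h3⟩
            · rintro ⟨h1, h2, m', hm', h3⟩
              rcases List.mem_cons.mp hm' with rfl | hm''
              · exact absurd (h3 ▸ hv) h1
              · exact ⟨h1, h2, m', hm'', h3⟩
        · have hvadd : PySem.Set.add vis (r + m.1, c + m.2) = vis ++ [(r + m.1, c + m.2)] := by
            unfold PySem.Set.add
            rw [if_neg (by simp only [PySem.Set.contains_eq_listContains, List.contains_eq_mem,
              decide_eq_true_eq]; exact hv)]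
          have hstep : pvBinner N t.1 t.2 r c (Sum.inr (vis, G)) m =
              Sum.inr (vis ++ [(r + m.1, c + m.2)], G ++ [(r + m.1, c + m.2)]) := by
            unfold pvBinner
            simp only []
            rw [if_pos ⟨hinb.1, hinb.2.1, hinb.2.2.1, hinb.2.2.2, hv⟩, if_neg hct, hvadd]
          rw [hstep]
          have htv1 : t ∉ vis ++ [(r + m.1, c + m.2)] := by
            simp only [List.mem_append, List.mem_singleton]
            rintro (h | h)
            · exact htv h
            · exact hct h.symm
          obtain ⟨ih1, ih2⟩ := ih (vis ++ [(r + m.1, c + m.2)]) (G ++ [(r + m.1, c + m.2)]) htv1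
          refine ⟨?_, ?_⟩
          · rintro ⟨m', hm', hinb', heq'⟩
            rcases List.mem_cons.mp hm' with rfl | hm''
            · exact absurd heq' hct
            · exact ih1 ⟨m', hm'', hinb', heq'⟩
          · intro hno
            obtain ⟨Δ', hΔ', hmem'⟩ := ih2 (fun ⟨m', hm', hinb', heq'⟩ =>
              hno ⟨m', List.mem_cons_of_mem _ hm', hinb', heq'⟩)
            refine ⟨(r + m.1, c + m.2) :: Δ', by rw [hΔ']; simp, fun p => ?_⟩
            constructor
            · intro hp
              rcases List.mem_cons.mp hp with rfl | hp'
              · exact ⟨hv, hinb, m, List.mem_cons_self, rfl⟩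
              · have := (hmem' p).mp hp'
                refine ⟨fun h => this.1 (List.mem_append_left _ h), this.2.1, ?_⟩
                obtain ⟨_, _, m', hm', h3⟩ := this
                exact ⟨m', List.mem_cons_of_mem _ hm', h3⟩
            · rintro ⟨h1, h2, m', hm', h3⟩
              by_cases hpc : p = (r + m.1, c + m.2)
              · exact hpc ▸ List.mem_cons_self
              · refine List.mem_cons_of_mem _ ((hmem' p).mpr ⟨?_, h2, ?_⟩)
                · simp only [List.mem_append, List.mem_singleton]
                  rintro (h | h)
                  · exact h1 h
                  · exact hpc h
                · rcases List.mem_cons.mp hm' with rfl | hm''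
                  · exact absurd h3 hpc
                  · exact ⟨m', hm'', h3⟩
    · have hstep : pvBinner N t.1 t.2 r c (Sum.inr (vis, G)) m = Sum.inr (vis, G) := by
        unfold pvBinner
        simp only []
        rw [if_neg (by intro hcon; exact hinb ⟨hcon.1, hcon.2.1, hcon.2.2.1, hcon.2.2.2.1⟩)]
      rw [hstep]
      obtain ⟨ih1, ih2⟩ := ih vis G htv
      refine ⟨?_, ?_⟩
      · rintro ⟨m', hm', hinb', heq'⟩
        rcases List.mem_cons.mp hm' with rfl | hm''
        · exact absurd hinb' hinb
        · exact ih1 ⟨m', hm'', hinb', heq'⟩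
      · intro hno
        obtain ⟨Δ, hΔ, hmem⟩ := ih2 (fun ⟨m', hm', hinb', heq'⟩ =>
          hno ⟨m', List.mem_cons_of_mem _ hm', hinb', heq'⟩)
        refine ⟨Δ, hΔ, fun p => ?_⟩
        rw [hmem p]
        constructor
        · rintro ⟨h1, h2, m', hm', h3⟩
          exact ⟨h1, h2, m', List.mem_cons_of_mem _ hm', h3⟩
        · rintro ⟨h1, h2, m', hm', h3⟩
          rcases List.mem_cons.mp hm' with rfl | hm''
          · exact absurd (h3 ▸ h2) hinb
          · exact ⟨h1, h2, m', hm'', h3⟩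

-- one whole wave, characterised as a set extension (or a hit on t)
lemma pvBstepChar {N : Int} {t : Int × Int} :
    ∀ (F : List (Int × Int)) (vis : PySem.Set (Int × Int)) (G : List (Int × Int)),
      t ∉ vis →
      ((∃ f ∈ F, ∃ m ∈ pvMoves, pvInb N (f.1 + m.1, f.2 + m.2) ∧ (f.1 + m.1, f.2 + m.2) = t) →
        F.foldl (fun acc rc => pvMoves.foldl (pvBinner N t.1 t.2 rc.1 rc.2) acc)
          (Sum.inr (vis, G)) = Sum.inl ()) ∧
      (¬(∃ f ∈ F, ∃ m ∈ pvMoves, pvInb N (f.1 + m.1, f.2 + m.2) ∧ (f.1 + m.1, f.2 + m.2) = t) →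
        ∃ Δ : List (Int × Int),
          F.foldl (fun acc rc => pvMoves.foldl (pvBinner N t.1 t.2 rc.1 rc.2) acc)
            (Sum.inr (vis, G)) = Sum.inr (vis ++ Δ, G ++ Δ) ∧
          (∀ p : Int × Int,
            p ∈ Δ ↔ (p ∉ vis ∧ pvInb N p ∧
              ∃ f ∈ F, ∃ m ∈ pvMoves, p = (f.1 + m.1, f.2 + m.2)))) := by
  intro F
  induction F with
  | nil =>
    intro vis G htv
    constructor
    · rintro ⟨f, hf, _⟩
      exact absurd hf List.not_mem_nil
    · intro _
      exact ⟨[], by simp, by simp⟩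
  | cons f F' ih =>
    intro vis G htv
    simp only [List.foldl_cons]
    obtain ⟨in1, in2⟩ := pvBinnerChar f.1 f.2 pvMoves vis G htv
    by_cases hhit : ∃ m ∈ pvMoves, pvInb N (f.1 + m.1, f.2 + m.2) ∧ (f.1 + m.1, f.2 + m.2) = t
    · rw [in1 hhit, pvBstepFold_inl]
      exact ⟨fun _ => rfl, fun hno =>
        absurd (by obtain ⟨m, hm, h1, h2⟩ := hhit; exact ⟨f, List.mem_cons_self, m, hm, h1, h2⟩) hno⟩
    · obtain ⟨Δ₁, hΔ₁, hmem₁⟩ := in2 hhit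
      rw [hΔ₁]
      have htv1 : t ∉ vis ++ Δ₁ := by
        simp only [List.mem_append]
        rintro (h | h)
        · exact htv h
        · obtain ⟨_, h2, m, hm, h3⟩ := (hmem₁ t).mp h
          exact hhit ⟨m, hm, h3 ▸ h2, h3.symm⟩
      obtain ⟨ih1, ih2⟩ := ih (vis ++ Δ₁) (G ++ Δ₁) htv1
      refine ⟨?_, ?_⟩
      · rintro ⟨f', hf', m', hm', hinb', heq'⟩
        rcases List.mem_cons.mp hf' with rfl | hf''
        · exact absurd ⟨m', hm', hinb', heq'⟩ hhit
        · exact ih1 ⟨f', hf'', m', hm', hinb', heq'⟩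
      · intro hno
        obtain ⟨Δ₂, hΔ₂, hmem₂⟩ := ih2 (fun ⟨f', hf', m', hm', hinb', heq'⟩ =>
          hno ⟨f', List.mem_cons_of_mem _ hf', m', hm', hinb', heq'⟩)
        refine ⟨Δ₁ ++ Δ₂, by rw [hΔ₂]; simp, fun p => ?_⟩
        simp only [List.mem_append]
        constructor
        · rintro (hp | hp)
          · obtain ⟨h1, h2, m', hm', h3⟩ := (hmem₁ p).mp hp
            exact ⟨h1, h2, f, List.mem_cons_self, m', hm', h3⟩
          · obtain ⟨h1, h2, f', hf', m', hm', h3⟩ := (hmem₂ p).mp hp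
            exact ⟨fun h => h1 (List.mem_append_left _ h), h2, f',
              List.mem_cons_of_mem _ hf', m', hm', h3⟩
        · rintro ⟨h1, h2, f', hf', m', hm', h3⟩
          by_cases hp1 : p ∈ Δ₁
          · exact Or.inl hp1
          · refine Or.inr ((hmem₂ p).mpr ⟨?_, h2, ?_⟩)
            · simp only [List.mem_append]
              rintro (h | h)
              · exact h1 h
              · exact hp1 h
            · rcases List.mem_cons.mp hf' with rfl | hf''
              · exact absurd ((hmem₁ p).mpr ⟨h1, h2, m', hm', h3⟩) hp1
              · exact ⟨f', hf'', m', hm', h3⟩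

-- the invariant tying the wave state (visited, frontier, level d) to B's grid
def pvVInv (N : Int) (t : Int × Int) (vis F : List (Int × Int)) (g : List (List Int))
    (d : Int) : Prop :=
  pvIdim N g ∧ 0 ≤ d ∧
  (∀ p : Int × Int, p ∈ vis ↔ (pvInb N p ∧ pvBget g p.1 p.2 ≠ -1)) ∧
  (∀ p : Int × Int, p ∈ F ↔ (pvInb N p ∧ pvBget g p.1 p.2 = d)) ∧
  (∀ p : Int × Int, pvInb N p → pvBget g p.1 p.2 ≤ d) ∧
  t ∉ vis

lemma pvLab_iff {N : Int} {t : Int × Int} {vis F : List (Int × Int)} {g : List (List Int)}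
    {d : Int} (inv : pvVInv N t vis F g d) {p : Int × Int} (hp : pvInb N p) :
    pvLab N (d + 1) g p ↔
      (p ∉ vis ∧ ∃ f ∈ F, ∃ m ∈ pvMoves, p = (f.1 + m.1, f.2 + m.2)) := by
  obtain ⟨hdim, hd0, hvis, hF, hle, htv⟩ := inv
  have hsub : (d : Int) + 1 - 1 = d := by ring
  constructor
  · rintro ⟨h1, m, hm, hinb, hv⟩
    rw [hsub] at hv
    have hq : (p.1 + m.1, p.2 + m.2) ∈ F := (hF _).mpr ⟨hinb, hv⟩
    refine ⟨fun hpv => ((hvis p).mp hpv).2 h1, (p.1 + m.1, p.2 + m.2), hq,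
      (-m.1, -m.2), pvNegPred m hm, ?_⟩
    obtain ⟨p1, p2⟩ := p
    simp only [Prod.ext_iff]
    constructor <;> ring
  · rintro ⟨hpv, f, hf, m, hm, hpe⟩
    have h1 : pvBget g p.1 p.2 = -1 := by
      by_contra hne
      exact hpv ((hvis p).mpr ⟨hp, hne⟩)
    have hfF := (hF f).mp hf
    have e1 : p.1 + -m.1 = f.1 := by
      have := congrArg Prod.fst hpe
      simp only [] at this
      omega
    have e2 : p.2 + -m.2 = f.2 := by
      have := congrArg Prod.snd hpe
      simp only [] at this
      omega
    refine ⟨h1, (-m.1, -m.2), pvNegMove m hm, ?_, ?_⟩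
    · show pvInb N (p.1 + -m.1, p.2 + -m.2)
      rw [e1, e2]
      exact hfF.1
    · show pvBget g (p.1 + -m.1) (p.2 + -m.2) = d + 1 - 1
      rw [e1, e2, hsub]
      exact hfF.2

-- the wave loop and the value iteration march in lock step
lemma pvSimVI {N : Int} {t : Int × Int} :
    ∀ (fuelB : Nat) (fuelV : Nat) (d : Int) (vis F : List (Int × Int)) (g : List (List Int)),
      pvVInv N t vis F g d →
      pvUV N g + 2 ≤ fuelB → pvUV N g + 2 ≤ fuelV →
      pvBloop N t.1 t.2 fuelB vis F d = pvVIloop N t.1 t.2 fuelV g d := by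
  intro fuelB
  induction fuelB using Nat.strong_induction_on with
  | _ fuelB IHs =>
    intro fuelV d vis F g inv hfb hfv
    obtain ⟨fb, rfl⟩ : ∃ f, fuelB = f + 1 := ⟨fuelB - 1, by omega⟩
    obtain ⟨fv, rfl⟩ : ∃ f, fuelV = f + 1 := ⟨fuelV - 1, by omega⟩
    obtain ⟨hdim, hd0, hvis, hF, hle, htv⟩ := inv
    have htgt : ¬(0 ≤ t.1 ∧ t.1 < N ∧ 0 ≤ t.2 ∧ t.2 < N ∧ pvBget g t.1 t.2 ≠ -1) := by
      rintro ⟨a1, a2, a3, a4, a5⟩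
      exact htv ((hvis t).mpr ⟨⟨a1, a2, a3, a4⟩, a5⟩)
    obtain ⟨hdim', hvals, hch⟩ := pvSweep_spec (N := N) (d := d + 1) (by omega) g hdim
    have hrhs : pvVIloop N t.1 t.2 (fv + 1) g d =
        (if (pvSweep N (d + 1) g).2 = true then
          pvVIloop N t.1 t.2 fv (pvSweep N (d + 1) g).1 (d + 1) else -1) := by
      conv_lhs => rw [pvVIloop]
      rw [if_neg htgt]
    rw [hrhs]
    cases F with
    | nil =>
      have hnolab : ¬ ∃ p : Int × Int, pvInb N p ∧ pvLab N (d + 1) g p := by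
        rintro ⟨p, hp, hl⟩
        obtain ⟨_, f, hf, _⟩ :=
          (pvLab_iff ⟨hdim, hd0, hvis, hF, hle, htv⟩ hp).mp hl
        cases hf
      have : (pvSweep N (d + 1) g).2 = false := by
        cases h : (pvSweep N (d + 1) g).2
        · rfl
        · exact absurd (hch.mp h) hnolab
      rw [this]
      simp [pvBloop]
    | cons f F' =>
      obtain ⟨hit1, hit2⟩ := pvBstepChar (N := N) (t := t) (f :: F') vis [] htv
      simp only [pvBloop]
      by_cases hhit : ∃ f' ∈ f :: F', ∃ m ∈ pvMoves,
          pvInb N (f'.1 + m.1, f'.2 + m.2) ∧ (f'.1 + m.1, f'.2 + m.2) = t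
      · rw [show pvBstep N t.1 t.2 vis (f :: F') = Sum.inl () from hit1 hhit]
        -- the sweep labels t with d+1; the next round's target check returns it
        obtain ⟨f', hf', m, hm, hinb', heq'⟩ := hhit
        have hinbt : pvInb N t := heq' ▸ hinb'
        have hlabt : pvLab N (d + 1) g t := by
          rw [pvLab_iff ⟨hdim, hd0, hvis, hF, hle, htv⟩ hinbt]
          exact ⟨htv, f', hf', m, hm, heq'.symm⟩
        have hcht : (pvSweep N (d + 1) g).2 = true :=
          hch.mpr ⟨t, hinbt, hlabt⟩
        simp only [hcht, eq_self_iff_true, if_true]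
        obtain ⟨fv', rfl⟩ : ∃ f, fv = f + 1 := ⟨fv - 1, by omega⟩
        have hgt : pvBget (pvSweep N (d + 1) g).1 t.1 t.2 = d + 1 :=
          (hvals t hinbt).1 hlabt
        have hcond : 0 ≤ t.1 ∧ t.1 < N ∧ 0 ≤ t.2 ∧ t.2 < N ∧
            pvBget (pvSweep N (d + 1) g).1 t.1 t.2 ≠ -1 :=
          ⟨hinbt.1, hinbt.2.1, hinbt.2.2.1, hinbt.2.2.2, by rw [hgt]; omega⟩
        have : pvVIloop N t.1 t.2 (fv' + 1) (pvSweep N (d + 1) g).1 (d + 1) =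
            pvBget (pvSweep N (d + 1) g).1 t.1 t.2 := by
          conv_lhs => rw [pvVIloop]
          rw [if_pos hcond]
        rw [this, hgt]
      · obtain ⟨Δ, hΔ, hmem⟩ := hit2 hhit
        rw [show pvBstep N t.1 t.2 vis (f :: F') = Sum.inr (vis ++ Δ, [] ++ Δ) from hΔ]
        simp only [List.nil_append]
        -- Δ is exactly the set of cells the sweep labels d+1
        have hlabiff : ∀ p : Int × Int, pvInb N p → (pvLab N (d + 1) g p ↔ p ∈ Δ) := by
          intro p hp
          rw [pvLab_iff ⟨hdim, hd0, hvis, hF, hle, htv⟩ hp, hmem p]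
          constructor
          · rintro ⟨h1, h2⟩; exact ⟨h1, hp, h2⟩
          · rintro ⟨h1, _, h2⟩; exact ⟨h1, h2⟩
        cases hΔe : Δ with
        | nil =>
          subst hΔe
          have : (pvSweep N (d + 1) g).2 = false := by
            cases h : (pvSweep N (d + 1) g).2
            · rfl
            · obtain ⟨p, hp, hl⟩ := hch.mp h
              exact absurd ((hlabiff p hp).mp hl) (List.not_mem_nil)
          rw [this]
          obtain ⟨fb', rfl⟩ : ∃ k, fb = k + 1 := ⟨fb - 1, by omega⟩
          simp [pvBloop]
        | cons p₀ Δ' =>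
          subst hΔe
          have hp₀ := (hmem p₀).mp List.mem_cons_self
          have hcht : (pvSweep N (d + 1) g).2 = true :=
            hch.mpr ⟨p₀, hp₀.2.1, (hlabiff p₀ hp₀.2.1).mpr List.mem_cons_self⟩
          simp only [hcht, eq_self_iff_true, if_true]
          -- re-establish the invariant one level down and recurse
          set g' := (pvSweep N (d + 1) g).1 with hg'
          have hgv : ∀ p : Int × Int, pvInb N p →
              (p ∈ (p₀ :: Δ') → pvBget g' p.1 p.2 = d + 1) ∧
              (p ∉ (p₀ :: Δ') → pvBget g' p.1 p.2 = pvBget g p.1 p.2) := by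
            intro p hp
            constructor
            · intro hpΔ
              exact (hvals p hp).1 ((hlabiff p hp).mpr hpΔ)
            · intro hpΔ
              exact (hvals p hp).2 (fun hl => hpΔ ((hlabiff p hp).mp hl))
          have inv' : pvVInv N t (vis ++ (p₀ :: Δ')) (p₀ :: Δ') g' (d + 1) := by
            refine ⟨hdim', by omega, ?_, ?_, ?_, ?_⟩
            · intro p
              simp only [List.mem_append]
              constructor
              · rintro (hp | hp)
                · have := (hvis p).mp hp
                  refine ⟨this.1, ?_⟩
                  by_cases hpΔ : p ∈ (p₀ :: Δ')
                  · rw [(hgv p this.1).1 hpΔ]; omega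
                  · rw [(hgv p this.1).2 hpΔ]; exact this.2
                · have := (hmem p).mp hp
                  refine ⟨this.2.1, ?_⟩
                  rw [(hgv p this.2.1).1 hp]; omega
              · rintro ⟨hp, hne⟩
                by_cases hpΔ : p ∈ (p₀ :: Δ')
                · exact Or.inr hpΔ
                · rw [(hgv p hp).2 hpΔ] at hne
                  exact Or.inl ((hvis p).mpr ⟨hp, hne⟩)
            · intro p
              constructor
              · intro hp
                have := (hmem p).mp hp
                exact ⟨this.2.1, (hgv p this.2.1).1 hp⟩
              · rintro ⟨hp, hv⟩
                by_cases hpΔ : p ∈ (p₀ :: Δ')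
                · exact hpΔ
                · rw [(hgv p hp).2 hpΔ] at hv
                  have := hle p hp
                  omega
            · intro p hp
              by_cases hpΔ : p ∈ (p₀ :: Δ')
              · rw [(hgv p hp).1 hpΔ]
              · rw [(hgv p hp).2 hpΔ]
                have := hle p hp
                omega
            · simp only [List.mem_append]
              rintro (h | h)
              · exact htv h
              · obtain ⟨_, h2, f', hf', m, hm, h3⟩ := (hmem t).mp h
                exact hhit ⟨f', hf', m, hm, h3 ▸ h2, h3.symm⟩
          have hdec : pvUV N g' < pvUV N g := by
            refine pvUV_lt (fun p hp hv => ?_) hp₀.2.1 ?_ ?_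
            · by_cases hpΔ : p ∈ (p₀ :: Δ')
              · rw [(hgv p hp).1 hpΔ] at hv
                omega
              · rw [(hgv p hp).2 hpΔ] at hv
                exact hv
            · by_contra hne
              exact hp₀.1 ((hvis p₀).mpr ⟨hp₀.2.1, hne⟩)
            · rw [(hgv p₀ hp₀.2.1).1 List.mem_cons_self]
              omega
          exact IHs fb (by omega) fv (d + 1) (vis ++ (p₀ :: Δ')) (p₀ :: Δ') g' inv'
            (by omega) (by omega)
-- the reference wave loop equals B
lemma pvLevel_eq_VI (N : Int) (r1 : Int) (c1 : Int) (r2 : Int) (c2 : Int)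
    (hPre : Pre_BFS N r1 c1 r2 c2) : pvLevelBFS N r1 c1 r2 c2 = BFS_alt N r1 c1 r2 c2 := by
  unfold pvLevelBFS BFS_alt
  rcases hPre with ⟨h1, h2, h3, h4, h5, h6, h7, h8⟩ | ⟨hne, hn1, hn2, hn3, hn4, hn5, hn6⟩
  case inr =>
    -- the start square has no on-board neighbour and is not the target: both sides return -1
    have hno : ∀ m ∈ pvMoves, ¬(0 ≤ r1 + m.1 ∧ r1 + m.1 < N ∧ 0 ≤ c1 + m.2 ∧ c1 + m.2 < N) := by
      intro m hm
      simp only [pvMoves, List.mem_cons, List.not_mem_nil, or_false] at hm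
      rcases hm with rfl | rfl | rfl | rfl | rfl | rfl <;> simp only [] <;> omega
    have hst : ((r2, c2) : Int × Int) ≠ (r1, c1) := by
      intro hc0
      exact hne ⟨(congrArg Prod.fst hc0).symm, (congrArg Prod.snd hc0).symm⟩
    rw [if_neg hne]
    set g1 := if 0 ≤ r1 ∧ r1 < N ∧ 0 ≤ c1 ∧ c1 < N then
        pvBset (List.replicate N.toNat (List.replicate N.toNat (-1 : Int))) r1 c1 0
      else List.replicate N.toNat (List.replicate N.toNat (-1 : Int)) with hg1def
    have hdim1 : pvIdim N g1 := by
      rw [hg1def]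
      split
      · exact pvIdim_bset (pvIdim_repm N) _ _ _
      · exact pvIdim_repm N
    have hg1at : ∀ q : Int × Int, pvInb N q → pvBget g1 q.1 q.2 = 0 →
        (0 ≤ r1 ∧ r1 < N ∧ 0 ≤ c1 ∧ c1 < N) ∧ q = (r1, c1) := by
      intro q hq hv
      rw [hg1def] at hv
      by_cases hsb : 0 ≤ r1 ∧ r1 < N ∧ 0 ≤ c1 ∧ c1 < N
      · rw [if_pos hsb] at hv
        by_cases hqs : q = (r1, c1)
        · exact ⟨hsb, hqs⟩
        · rw [show pvBget (pvBset (List.replicate N.toNat (List.replicate N.toNat (-1 : Int)))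
              r1 c1 0) q.1 q.2 = pvBget (List.replicate N.toNat (List.replicate N.toNat
              (-1 : Int))) q.1 q.2 from pvBget_bset_other (pvIdim_repm N)
              ⟨hsb.1, hsb.2.1, hsb.2.2.1, hsb.2.2.2⟩
              (by obtain ⟨q1, q2⟩ := q; exact hq)
              (by obtain ⟨q1, q2⟩ := q; exact fun h => hqs h) 0] at hv
          rw [pvBget_repm (by obtain ⟨q1, q2⟩ := q; exact hq)] at hv
          omega
      · rw [if_neg hsb] at hv
        rw [pvBget_repm (by obtain ⟨q1, q2⟩ := q; exact hq)] at hv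
        omega
    have hg1t : ∀ q : Int × Int, pvInb N q → q ≠ (r1, c1) → pvBget g1 q.1 q.2 = -1 := by
      intro q hq hqs
      rw [hg1def]
      by_cases hsb : 0 ≤ r1 ∧ r1 < N ∧ 0 ≤ c1 ∧ c1 < N
      · rw [if_pos hsb,
          pvBget_bset_other (pvIdim_repm N) ⟨hsb.1, hsb.2.1, hsb.2.2.1, hsb.2.2.2⟩
            (by obtain ⟨q1, q2⟩ := q; exact hq)
            (by obtain ⟨q1, q2⟩ := q; exact fun h => hqs h) 0,
          pvBget_repm (by obtain ⟨q1, q2⟩ := q; exact hq)]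
      · rw [if_neg hsb, pvBget_repm (by obtain ⟨q1, q2⟩ := q; exact hq)]
    -- left side: the single wave produces nothing
    show pvBloop N r2 c2 ((N.toNat * N.toNat + 1) + 1)
        (PySem.Set.ofList [(r1, c1)]) [(r1, c1)] 0 =
      pvVIloop N r2 c2 ((N.toNat * N.toNat + 1) + 1) g1 0
    have hvis0 : PySem.Set.ofList [((r1 : Int), c1)] = [((r1 : Int), c1)] := rfl
    rw [hvis0]
    have htv : ((r2, c2) : Int × Int) ∉ [((r1 : Int), c1)] := by
      rw [List.mem_singleton]
      exact hst
    obtain ⟨_, hit2⟩ := pvBstepChar (N := N) (t := ((r2 : Int), c2)) [(r1, c1)] [(r1, c1)] [] htv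
    have hnohit : ¬ ∃ f ∈ [((r1 : Int), c1)], ∃ m ∈ pvMoves,
        pvInb N (f.1 + m.1, f.2 + m.2) ∧ (f.1 + m.1, f.2 + m.2) = ((r2 : Int), c2) := by
      rintro ⟨f, hf, m, hm, hinb, _⟩
      rw [List.mem_singleton] at hf
      subst hf
      exact hno m hm hinb
    obtain ⟨Δ, hΔ, hmem⟩ := hit2 hnohit
    have hΔnil : Δ = [] := by
      rw [List.eq_nil_iff_forall_not_mem]
      intro p hp
      obtain ⟨_, hpin, f, hf, m, hm, hpe⟩ := (hmem p).mp hp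
      rw [List.mem_singleton] at hf
      subst hf
      subst hpe
      exact hno m hm hpin
    subst hΔnil
    conv_lhs => rw [pvBloop]
    rw [show pvBstep N r2 c2 [((r1 : Int), c1)] [(r1, c1)] = Sum.inr ([(r1, c1)] ++ [], [] ++ []) from hΔ]
    -- right side: the first sweep labels nothing
    have htgt : ¬(0 ≤ r2 ∧ r2 < N ∧ 0 ≤ c2 ∧ c2 < N ∧ pvBget g1 r2 c2 ≠ -1) := by
      rintro ⟨a1, a2, a3, a4, a5⟩
      exact a5 (hg1t (r2, c2) ⟨a1, a2, a3, a4⟩ hst)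
    obtain ⟨_, _, hch⟩ := pvSweep_spec (N := N) (d := (0 : Int) + 1) (by omega) g1 hdim1
    have hnolab : ¬ ∃ p : Int × Int, pvInb N p ∧ pvLab N ((0 : Int) + 1) g1 p := by
      rintro ⟨p, hp, h1, m, hm, hinb, hv⟩
      rw [show ((0 : Int) + 1 - 1) = 0 by ring] at hv
      obtain ⟨hsb, hqs⟩ := hg1at _ hinb hv
      have hmv : ((-m.1, -m.2) : Int × Int) ∈ pvMoves := pvNegPred m hm
      refine hno (-m.1, -m.2) hmv ?_
      have e1 : p.1 + m.1 = r1 := congrArg Prod.fst hqs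
      have e2 : p.2 + m.2 = c1 := congrArg Prod.snd hqs
      obtain ⟨b1, b2, b3, b4⟩ := hp
      simp only []
      omega
    have hchf : (pvSweep N ((0 : Int) + 1) g1).2 = false := by
      cases h : (pvSweep N ((0 : Int) + 1) g1).2
      · rfl
      · exact absurd (hch.mp h) hnolab
    conv_rhs => rw [pvVIloop]
    rw [if_neg htgt]
    simp only [hchf]
    simp [pvBloop]
  -- everything on the board
  have hs : pvInb N (r1, c1) := ⟨h1, h2, h3, h4⟩
  have ht : pvInb N (r2, c2) := ⟨h5, h6, h7, h8⟩
  set g0 := List.replicate N.toNat (List.replicate N.toNat (-1 : Int)) with hg0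
  have hg1 : (if 0 ≤ r1 ∧ r1 < N ∧ 0 ≤ c1 ∧ c1 < N then pvBset g0 r1 c1 0 else g0) =
      pvBset g0 r1 c1 0 := if_pos ⟨h1, h2, h3, h4⟩
  have hdim1 : pvIdim N (pvBset g0 r1 c1 0) := pvIdim_bset (pvIdim_repm N) _ _ _
  have hself : pvBget (pvBset g0 r1 c1 0) r1 c1 = 0 := pvBget_bset_self (pvIdim_repm N) hs 0
  have hother : ∀ q : Int × Int, pvInb N q → q ≠ (r1, c1) →
      pvBget (pvBset g0 r1 c1 0) q.1 q.2 = -1 := by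
    intro q hq hqs
    rw [pvBget_bset_other (pvIdim_repm N) hs (by obtain ⟨q1, q2⟩ := q; exact hq)
      (by obtain ⟨q1, q2⟩ := q; exact fun h => hqs h) 0]
    exact pvBget_repm (by obtain ⟨q1, q2⟩ := q; exact hq)
  by_cases hstart : r1 = r2 ∧ c1 = c2
  · rw [if_pos hstart]
    show (0 : Int) = pvVIloop N r2 c2 ((N.toNat * N.toNat + 1) + 1)
      (if 0 ≤ r1 ∧ r1 < N ∧ 0 ≤ c1 ∧ c1 < N then pvBset g0 r1 c1 0 else g0) 0
    rw [hg1]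
    obtain ⟨e1, e2⟩ := hstart
    subst e1; subst e2
    conv_rhs => rw [pvVIloop]
    rw [if_pos ⟨h1, h2, h3, h4, by rw [hself]; omega⟩, hself]
  · rw [if_neg hstart]
    show pvBloop N r2 c2 (N.toNat * N.toNat + 2) (PySem.Set.ofList [(r1, c1)]) [(r1, c1)] 0 =
      pvVIloop N r2 c2 (N.toNat * N.toNat + 2)
        (if 0 ≤ r1 ∧ r1 < N ∧ 0 ≤ c1 ∧ c1 < N then pvBset g0 r1 c1 0 else g0) 0
    rw [hg1]
    have hvis0 : PySem.Set.ofList [((r1 : Int), c1)] = [((r1 : Int), c1)] := rfl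
    rw [hvis0]
    have hst : ((r2, c2) : Int × Int) ≠ (r1, c1) := by
      intro hc0
      exact hstart ⟨(congrArg Prod.fst hc0).symm, (congrArg Prod.snd hc0).symm⟩
    have inv : pvVInv N (r2, c2) [(r1, c1)] [(r1, c1)] (pvBset g0 r1 c1 0) 0 := by
      refine ⟨hdim1, le_refl 0, ?_, ?_, ?_, ?_⟩
      · intro p
        rw [List.mem_singleton]
        constructor
        · rintro rfl
          exact ⟨hs, by rw [hself]; omega⟩
        · rintro ⟨hp, hne⟩
          by_contra hps
          exact hne (hother p hp hps)
      · intro p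
        rw [List.mem_singleton]
        constructor
        · rintro rfl
          exact ⟨hs, hself⟩
        · rintro ⟨hp, hv⟩
          by_contra hps
          rw [hother p hp hps] at hv
          omega
      · intro p hp
        by_cases hps : p = (r1, c1)
        · subst hps
          rw [hself]
        · rw [hother p hp hps]
          omega
      · rw [List.mem_singleton]
        exact hst
    exact pvSimVI (N.toNat * N.toNat + 2) (N.toNat * N.toNat + 2) 0 [(r1, c1)] [(r1, c1)]
      (pvBset g0 r1 c1 0) inv (by have := pvUV_le N (pvBset g0 r1 c1 0); omega)
      (by have := pvUV_le N (pvBset g0 r1 c1 0); omega)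

-- ===== VERDICT (by name: the statement is the Claim_ definition above) =====
theorem BFS_spec : Claim_equal_BFS := by
  intro N r1 c1 r2 c2 _ hPre
  unfold Spec_BFS
  rw [pvA_eq_level N r1 c1 r2 c2 hPre, pvLevel_eq_VI N r1 c1 r2 c2 hPre]
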